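-- pv_equiv track=rewrite | github.com/kimdahee7/CodingTest_Python | 프로그래머스/2/154540. 무인도 여행/무인도 여행.py | solution
-- ===== SOURCE A (Python) =====
-- from collections import deque
--
-- def solution(maps):
--     answer = []
--     visited = [[0 for _ in range(len(maps[0]))] for _ in range(len(maps))]
--     for i in range(len(maps)):
--         for j in range(len(maps[0])):
--             if maps[i][j] != "X" and visited[i][j] == 0:
--                 answer.append(bfs(j,i,maps,visited))
--     if len(answer) == 0:
--         return [-1]
--     answer.sort()
--     return answer
--
-- dx = [0,0,1,-1]
--
-- dy = [1,-1,0,0]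
--
-- def bfs(x,y,maps,visited):
--     total = 0
--     q = deque()
--     q.append((x,y))
--     visited[y][x] = 1
--     total += int(maps[y][x])
--     while q:
--         a,b = q.popleft()
--         for i in range(4):
--             nx = a + dx[i]
--             ny = b + dy[i]
--             if 0<=nx<len(maps[0]) and 0<=ny<len(maps) and maps[ny][nx] != "X" and visited[ny][nx] == 0:
--                 q.append((nx,ny))
--                 visited[ny][nx] = 1
--                 total += int(maps[ny][nx])
--     return total
-- ===== SOURCE B (Python) =====
-- def solution(maps):
--     # min-label propagation over a dict of land cells instead of a BFS flood fill
--     h, w = len(maps), len(maps[0])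
--     land = [(r, c) for r in range(h) for c in range(w) if maps[r][c] != "X"]
--     label = {p: p[0] * w + p[1] for p in land}
--     changed = True
--     while changed:
--         changed = False
--         for r, c in land:
--             m = label[(r, c)]
--             for q in ((r - 1, c), (r + 1, c), (r, c - 1), (r, c + 1)):
--                 if q in label and label[q] < m:
--                     m = label[q]
--             if m < label[(r, c)]:
--                 label[(r, c)] = m
--                 changed = True
--     sums = {}
--     for r, c in land:
--         root = label[(r, c)]
--         sums[root] = sums.get(root, 0) + int(maps[r][c])
--     return sorted(sums.values()) if sums else [-1]
-- ===== Notes on version B (the rewrite author's own statement) =====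
-- stated objective: alternative
-- what changed: Replaces the BFS flood fill (deque frontier, visited grid, per-island traversal) by min-label propagation: every land cell starts labelled with its own row-major index in a dict, repeated sweeps lower each label to the minimum over the cell and its neighbours until a fixpoint, and a final grouping pass sums cell values per root label; no frontier, no visited grid, no per-component traversal.
-- outside the precondition, e.g. on solution([]): A returns [-1], B raises IndexError
import Mathlib
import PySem

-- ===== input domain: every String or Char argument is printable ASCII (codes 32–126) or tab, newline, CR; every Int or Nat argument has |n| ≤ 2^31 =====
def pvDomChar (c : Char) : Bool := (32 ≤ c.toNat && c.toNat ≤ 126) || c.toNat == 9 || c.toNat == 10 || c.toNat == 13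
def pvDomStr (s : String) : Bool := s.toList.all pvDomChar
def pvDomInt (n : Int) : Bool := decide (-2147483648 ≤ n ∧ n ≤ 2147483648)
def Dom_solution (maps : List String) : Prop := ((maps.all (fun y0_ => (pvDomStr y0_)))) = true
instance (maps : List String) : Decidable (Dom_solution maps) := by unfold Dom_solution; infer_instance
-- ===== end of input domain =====

-- B replaces A's BFS flood fill by min-label propagation: each land cell starts labelled with
-- its own row-major index in a dict, sweeps lower each label to the minimum over the cell and
-- its in-dict neighbours until nothing changes, and a final pass groups the cell values by root
-- label; the sorted group sums (or [-1] if there is no land) are proved equal to A's output.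

-- ===== shared grid helpers (each is one Python expression) =====
abbrev Cell := Int × Int
abbrev Vis := List (List Int)

-- len(maps) and len(maps[0]) (the .getD "" stands where Python raises IndexError; excluded by Pre_)
def gh (maps : List String) : Int := PySem.List.len maps
def gw (maps : List String) : Int := PySem.Str.len ((PySem.List.pyGet? maps 0).getD "")
-- maps[y][x]; the .getD 'X' stands where Python raises IndexError (excluded by Pre_)
def cellD (maps : List String) (y x : Int) : Char :=
  (PySem.List.pyGet? ((PySem.List.pyGet? maps y).getD "").toList x).getD 'X'
-- int(maps[y][x]) : exact for the single digit characters '0'..'9' that Pre_ admits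
def digitVal (c : Char) : Int := (c.toNat : Int) - 48
def valAt (maps : List String) (y x : Int) : Int := digitVal (cellD maps y x)
-- visited[y][x] ; the .getD 1 stands where Python raises IndexError (never reached in-range)
def vget (V : Vis) (y x : Int) : Int :=
  (PySem.List.pyGet? ((PySem.List.pyGet? V y).getD []) x).getD 1
-- visited[y][x] = 1
def vset (V : Vis) (y x : Int) : Vis :=
  PySem.List.pySetD V y (PySem.List.pySetD ((PySem.List.pyGet? V y).getD []) x 1)
-- the bfs guard: 0<=nx<len(maps[0]) and 0<=ny<len(maps) and maps[ny][nx] != "X" and visited[ny][nx] == 0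
def okb (maps : List String) (V : Vis) (nx ny : Int) : Bool :=
  decide (0 ≤ nx) && decide (nx < gw maps) && decide (0 ≤ ny) && decide (ny < gh maps) &&
    (cellD maps ny nx != 'X') && (vget V ny nx == 0)

-- in-bounds and not 'X' (proof-side reading of the guard's first five conjuncts)
def elig0 (maps : List String) (nx ny : Int) : Prop :=
  0 ≤ nx ∧ nx < gw maps ∧ 0 ≤ ny ∧ ny < gh maps ∧ cellD maps ny nx ≠ 'X'

-- number of unvisited entries: the bfs loop's termination measure (with the worklist length)
def zeros (V : Vis) : Nat := (V.map (fun r => r.count 0)).sum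

-- termination helper lemmas (cited by port A's decreasing_by)
lemma vget_nonneg (V : Vis) (y x : Int) (hy : 0 ≤ y) (hx : 0 ≤ x) :
    vget V y x = ((V[y.toNat]?.getD [])[x.toNat]?).getD 1 := by
  simp [vget, PySem.List.pyGet?_of_nonneg _ hy, PySem.List.pyGet?_of_nonneg _ hx]

lemma vget_some (V : Vis) (y x : Int) (hy : 0 ≤ y) (hx : 0 ≤ x) (h : vget V y x = 0) :
    ∃ row, V[y.toNat]? = some row ∧ row[x.toNat]? = some 0 := by
  rw [vget_nonneg V y x hy hx] at h
  cases hr : V[y.toNat]? with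
  | none => rw [hr] at h; simp at h
  | some row =>
    rw [hr] at h
    simp only [Option.getD_some] at h
    cases he : row[x.toNat]? with
    | none => rw [he] at h; simp at h
    | some v => rw [he] at h; simp at h; exact ⟨row, rfl, by rw [he]; simp [h]⟩

lemma vset_eq_set (V : Vis) (y x : Int) (hy : 0 ≤ y) (hx : 0 ≤ x) (h : vget V y x = 0) :
    ∃ row, V[y.toNat]? = some row ∧ row[x.toNat]? = some 0 ∧
      vset V y x = V.set y.toNat (row.set x.toNat 1) := by
  obtain ⟨row, hr, he⟩ := vget_some V y x hy hx h
  refine ⟨row, hr, he, ?_⟩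
  simp [vset, PySem.List.pyGet?_of_nonneg _ hy, PySem.List.pySetD_of_nonneg _ _ hy,
    PySem.List.pySetD_of_nonneg _ _ hx, hr]

lemma count_set_eq (r : List Int) : ∀ (xn : Nat), r[xn]? = some 0 → (r.set xn 1).count 0 + 1 = r.count 0 := by
  induction r with
  | nil => intro xn h; simp at h
  | cons a r ih =>
    intro xn h
    cases xn with
    | zero =>
      simp at h
      rw [h]
      simp [List.count_cons]
    | succ k =>
      simp at h
      have := ih k h
      rw [List.set_cons_succ]
      simp only [List.count_cons]
      omega

lemma zeros_set_eq (V : Vis) : ∀ (yn : Nat) (row : List Int), V[yn]? = some row →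
    ∀ (xn : Nat), row[xn]? = some 0 → zeros (V.set yn (row.set xn 1)) + 1 = zeros V := by
  induction V with
  | nil => intro yn row h; simp at h
  | cons r V ih =>
    intro yn row h xn he
    cases yn with
    | zero =>
      simp at h
      subst h
      simp only [List.set_cons_zero, zeros, List.map_cons, List.sum_cons]
      have := count_set_eq r xn he
      omega
    | succ k =>
      simp at h
      have := ih k row h xn he
      rw [List.set_cons_succ]
      simp only [zeros, List.map_cons, List.sum_cons] at this ⊢
      omega

lemma zeros_vset_eq (V : Vis) (y x : Int) (hy : 0 ≤ y) (hx : 0 ≤ x)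
    (h : vget V y x = 0) : zeros (vset V y x) + 1 = zeros V := by
  obtain ⟨row, hr, he, hs⟩ := vset_eq_set V y x hy hx h
  rw [hs]
  exact zeros_set_eq V y.toNat row hr x.toNat he

lemma okb_iff (maps : List String) (V : Vis) (nx ny : Int) :
    okb maps V nx ny = true ↔ elig0 maps nx ny ∧ vget V ny nx = 0 := by
  simp [okb, elig0, Bool.and_eq_true, decide_eq_true_eq, bne_iff_ne, beq_iff_eq, and_assoc]

lemma foldl_mu_le {σ β : Type} (μ : σ → Nat) (f : σ → β → σ) (h : ∀ s b, μ (f s b) ≤ μ s) :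
    ∀ (l : List β) (s : σ), μ (l.foldl f s) ≤ μ s := by
  intro l
  induction l with
  | nil => intro s; simp
  | cons b l ih => intro s; exact le_trans (ih (f s b)) (h s b)

-- ===== PORT A ===== (BFS: deque, popleft, dx/dy offset tables)
def dxA : List Int := [0, 0, 1, -1]
def dyA : List Int := [1, -1, 0, 0]

def bfsStep (maps : List String) (a b : Int) (st : List Cell × Vis × Int) (i : Int) :
    List Cell × Vis × Int :=
  let nx := a + PySem.List.pyGetD dxA i 0
  let ny := b + PySem.List.pyGetD dyA i 0
  if okb maps st.2.1 nx ny then (st.1 ++ [(nx, ny)], vset st.2.1 ny nx, st.2.2 + valAt maps ny nx)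
  else st

lemma mu_bfsStep (maps : List String) (a b : Int) (st : List Cell × Vis × Int) (i : Int) :
    zeros (bfsStep maps a b st i).2.1 + (bfsStep maps a b st i).1.length ≤
      zeros st.2.1 + st.1.length := by
  simp only [bfsStep]
  split
  case isTrue h =>
    obtain ⟨⟨h1, _, h3, _, _⟩, h0⟩ := (okb_iff maps st.2.1 _ _).1 h
    have := zeros_vset_eq st.2.1 _ _ h3 h1 h0
    simp
    omega
  case isFalse => exact le_refl _

def bfsLoop (maps : List String) : List Cell → Vis → Int → Int × Vis
  | [], V, t => (t, V)
  | (a, b) :: rest, V, t =>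
    let st := (PySem.List.pyRange 0 4 1).foldl (bfsStep maps a b) (rest, V, t)
    bfsLoop maps st.1 st.2.1 st.2.2
termination_by q V _ => zeros V + q.length
decreasing_by
  have h := foldl_mu_le (fun s : List Cell × Vis × Int => zeros s.2.1 + s.1.length)
    (bfsStep maps a b) (fun s i => mu_bfsStep maps a b s i) (PySem.List.pyRange 0 4 1) (rest, V, t)
  dsimp only at h
  simp only [List.length_cons]
  omega

-- bfs(x, y, maps, visited)
def bfsA (maps : List String) (x y : Int) (V : Vis) : Int × Vis :=
  bfsLoop maps [(x, y)] (vset V y x) (valAt maps y x)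

-- body of the double loop of A's solution
def colStepA (maps : List String) (i : Int) (st : List Int × Vis) (j : Int) : List Int × Vis :=
  if (cellD maps i j != 'X') && (vget st.2 i j == 0) then
    let r := bfsA maps j i st.2
    (st.1 ++ [r.1], r.2)
  else st

def rowStepA (maps : List String) (st : List Int × Vis) (i : Int) : List Int × Vis :=
  (PySem.List.pyRange 0 (gw maps) 1).foldl (colStepA maps i) st

def solution (maps : List String) : List Int :=
  let visited : Vis :=
    (PySem.List.pyRange 0 (gh maps) 1).map
      (fun _ => (PySem.List.pyRange 0 (gw maps) 1).map (fun _ => (0 : Int)))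
  let res := (PySem.List.pyRange 0 (gh maps) 1).foldl (rowStepA maps) ([], visited)
  if res.1.length = 0 then [-1] else PySem.List.sorted res.1 (fun x => x) false

-- ===== PORT B ===== (min-label propagation over a dict; no traversal, no visited grid)
abbrev LDict := PySem.Dict Cell Int

-- land = [(r, c) for r in range(h) for c in range(w) if maps[r][c] != "X"]
def landB (maps : List String) : List Cell :=
  (PySem.List.pyRange 0 (gh maps) 1).flatMap (fun r =>
    ((PySem.List.pyRange 0 (gw maps) 1).filter (fun c => cellD maps r c != 'X')).map
      (fun c => ((r : Int), (c : Int))))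

-- p[0] * w + p[1]
def idxB (maps : List String) (p : Cell) : Int := p.1 * gw maps + p.2

-- label = {p: p[0] * w + p[1] for p in land}
def label0 (maps : List String) : LDict :=
  (landB maps).foldl (fun d p => d.insert p (idxB maps p)) PySem.Dict.empty

-- the four neighbour tuples ((r-1,c),(r+1,c),(r,c-1),(r,c+1))
def nbrsB (p : Cell) : List Cell := [(p.1 - 1, p.2), (p.1 + 1, p.2), (p.1, p.2 - 1), (p.1, p.2 + 1)]

-- the inner 'for q in …: if q in label and label[q] < m: m = label[q]'
def minFold (L : LDict) (qs : List Cell) (m0 : Int) : Int :=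
  qs.foldl (fun m q => if L.contains q && decide (L.getD q 0 < m) then L.getD q 0 else m) m0

-- one cell of a sweep; the .getD 0 reads label[(r,c)], whose key is always present
def sweepStep (st : LDict × Bool) (p : Cell) : LDict × Bool :=
  let m0 := st.1.getD p 0
  let m := minFold st.1 (nbrsB p) m0
  if m < m0 then (st.1.insert p m, true) else st

-- one pass of the while-loop body (changed = False; for p in land: …)
def sweep (maps : List String) (L : LDict) : LDict × Bool :=
  (landB maps).foldl sweepStep (L, false)

-- while changed: …  — fuel-bounded recursion; the fuel below is exact because every changing
-- sweep strictly decreases the total of the (nonnegative) labels (lemma sweep_decreases below)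
def labelLoop (maps : List String) : Nat → LDict → LDict
  | 0, L => L
  | Nat.succ n, L =>
    let s := sweep maps L
    if s.2 then labelLoop maps n s.1 else s.1

def muL (L : LDict) : Nat := (L.values.map Int.toNat).sum

def labelsB (maps : List String) : LDict := labelLoop maps (muL (label0 maps) + 1) (label0 maps)

-- sums[root] = sums.get(root, 0) + int(maps[r][c])
def sumsB (maps : List String) (L : LDict) : PySem.Dict Int Int :=
  (landB maps).foldl
    (fun s p => s.insert (L.getD p 0) (s.getD (L.getD p 0) 0 + valAt maps p.1 p.2))
    PySem.Dict.empty

def solution_alt (maps : List String) : List Int :=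
  let s := sumsB maps (labelsB maps)
  if s.items = [] then [-1] else PySem.List.sorted s.values (fun x => x) false

-- ===== PRECONDITION & SPEC =====
-- Pre_ excludes the inputs where Python A raises (a row shorter than the first row: IndexError;
-- a non-'X' non-digit character in the first len(maps[0]) columns: ValueError from int()), and the
-- empty list, where A happens to return [-1] (its comprehension never evaluates len(maps[0])) while
-- B's up-front len(maps[0]) raises IndexError.
def Pre_solution (maps : List String) : Prop :=
  maps ≠ [] ∧ (maps.all (fun s => decide ((gw maps).toNat ≤ s.toList.length) &&
    (s.toList.take (gw maps).toNat).all (fun c => c == 'X' || c.isDigit))) = true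
instance (maps : List String) : Decidable (Pre_solution maps) := by
  unfold Pre_solution; infer_instance

def pvWitness_solution : List String := ["01", "X9"]

def Spec_solution (maps : List String) (out : List Int) : Prop := out = solution_alt maps
instance (maps : List String) (out : List Int) : Decidable (Spec_solution maps out) := by
  unfold Spec_solution; infer_instance

-- ===== CLAIM (what is proved, stated in full; the proofs are below) =====
def Claim_equal_solution : Prop :=
  ∀ (maps : List String), Dom_solution maps → Pre_solution maps →
    Spec_solution maps (solution maps)

-- ===== LEMMAS AND PROOFS =====

-- ===== Part 1: worklist machinery for port A (reach sets, marking, the bfs postcondition) =====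

-- cells reachable from the worklist `q` through unvisited eligible cells
def elig (maps : List String) (c : Cell) : Prop := elig0 maps c.1 c.2

def nbrs (a b : Int) : List Cell := [(a, b + 1), (a, b - 1), (a + 1, b), (a - 1, b)]

inductive Reach (maps : List String) (V : Vis) (q : List Cell) : Cell → Prop where
  | base {c : Cell} (h : c ∈ q) : Reach maps V q c
  | step {c n : Cell} (hc : Reach maps V q c) (hn : n ∈ nbrs c.1 c.2) (he : elig maps n)
      (hu : vget V n.2 n.1 = 0) : Reach maps V q n

def markList (V : Vis) (l : List Cell) : Vis := l.foldl (fun W n => vset W n.2 n.1) V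

def sumVals (maps : List String) (l : List Cell) : Int :=
  (l.map (fun n => valAt maps n.2 n.1)).sum

def cells (maps : List String) : List Cell :=
  (List.range (gw maps).toNat).flatMap
    (fun x : Nat => (List.range (gh maps).toNat).map (fun y : Nat => ((x : Int), (y : Int))))

def addSum (maps : List String) (V V' : Vis) : Int :=
  (((cells maps).filter (fun c => (vget V c.2 c.1 == 0) && (vget V' c.2 c.1 != 0))).map
    (fun c => valAt maps c.2 c.1)).sum

def vals01 (V : Vis) : Prop := ∀ r ∈ V, ∀ v ∈ r, v = 0 ∨ v = 1

def LoopInv (maps : List String) (V : Vis) (q : List Cell) : Prop :=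
  ∀ c ∈ q, elig maps c ∧ vget V c.2 c.1 ≠ 0

-- what the bfs loop computes, relative to its starting state
def Post (maps : List String) (V : Vis) (q : List Cell) (t : Int) (res : Int × Vis) : Prop :=
  (∀ x y : Int, 0 ≤ x → 0 ≤ y →
      (vget res.2 y x = 0 ↔ vget V y x = 0 ∧ ¬ Reach maps V q (x, y)))
  ∧ res.2.map List.length = V.map List.length
  ∧ (vals01 V → vals01 res.2)
  ∧ res.1 = t + addSum maps V res.2

def newOf (maps : List String) (V : Vis) (c : Cell) : List Cell :=
  (nbrs c.1 c.2).filter (fun n => okb maps V n.1 n.2)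

def GoodV (maps : List String) (V : Vis) : Prop :=
  V.map List.length = List.replicate (gh maps).toNat (gw maps).toNat ∧ vals01 V

-- proof-side twin of one bfsStep, over the explicit neighbour tuple
def stepF (maps : List String) (st : List Cell × Vis × Int) (n : Cell) :
    List Cell × Vis × Int :=
  if okb maps st.2.1 n.1 n.2 then (st.1 ++ [n], vset st.2.1 n.2 n.1, st.2.2 + valAt maps n.2 n.1)
  else st

-- basic facts
lemma mem_cells (maps : List String) (c : Cell) :
    c ∈ cells maps ↔ 0 ≤ c.1 ∧ c.1 < gw maps ∧ 0 ≤ c.2 ∧ c.2 < gh maps := by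
  obtain ⟨cx, cy⟩ := c
  simp only [cells, List.mem_flatMap, List.mem_map, List.mem_range]
  constructor
  · rintro ⟨x1, hx1, y1, hy1, h⟩
    obtain ⟨rfl, rfl⟩ := Prod.mk.injEq .. ▸ h
    simp at h ⊢
    omega
  · rintro ⟨h1, h2, h3, h4⟩
    exact ⟨cx.toNat, by omega, ⟨cy.toNat, by omega, by simp; omega⟩⟩

lemma nodup_cells (maps : List String) : (cells maps).Nodup := by
  unfold cells
  rw [List.nodup_flatMap]
  constructor
  · intro x _
    exact (List.nodup_range).map (fun a b hab => by simpa using hab)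
  · apply List.Pairwise.imp ?_ (List.nodup_range (n := (gw maps).toNat))
    intro a b hab z hza hzb
    simp only [List.mem_map, List.mem_range] at hza hzb
    obtain ⟨y1, _, rfl⟩ := hza
    obtain ⟨y2, _, heq⟩ := hzb
    rw [Prod.mk.injEq] at heq
    omega

lemma nodup_nbrs (a b : Int) : (nbrs a b).Nodup := by
  simp [nbrs, Prod.ext_iff]
  omega

lemma vget_vset (V : Vis) (y x : Int) (hy : 0 ≤ y) (hx : 0 ≤ x) (h : vget V y x = 0)
    (y' x' : Int) (hy' : 0 ≤ y') (hx' : 0 ≤ x') :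
    vget (vset V y x) y' x' = if y' = y ∧ x' = x then 1 else vget V y' x' := by
  obtain ⟨row, hr, he, hs⟩ := vset_eq_set V y x hy hx h
  have hylt : y.toNat < V.length := (List.getElem?_eq_some_iff.1 hr).1
  have hxlt : x.toNat < row.length := (List.getElem?_eq_some_iff.1 he).1
  rw [hs, vget_nonneg _ _ _ hy' hx']
  by_cases hyy : y' = y
  · subst hyy
    rw [List.getElem?_set_self (by omega)]
    simp only [Option.getD_some]
    by_cases hxx : x' = x
    · subst hxx
      rw [List.getElem?_set_self (by omega)]
      simp
    · rw [List.getElem?_set_ne (by omega)]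
      rw [if_neg (by tauto), vget_nonneg V y' x' hy hx', hr]
      simp
  · rw [List.getElem?_set_ne (by omega), if_neg (by tauto), vget_nonneg V y' x' hy' hx']

lemma vset_maplen (V : Vis) (y x : Int) (hy : 0 ≤ y) (hx : 0 ≤ x) (h : vget V y x = 0) :
    (vset V y x).map List.length = V.map List.length := by
  obtain ⟨row, hr, he, hs⟩ := vset_eq_set V y x hy hx h
  have hylt : y.toNat < V.length := (List.getElem?_eq_some_iff.1 hr).1
  rw [hs, List.map_set]
  have hrow : V[y.toNat] = row := (List.getElem?_eq_some_iff.1 hr).2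
  apply List.ext_getElem (by simp)
  intro i h1 h2
  rcases eq_or_ne i y.toNat with rfl | hne
  · rw [List.getElem_set_self (by simpa using h1), List.getElem_map, hrow]
    simp
  · rw [List.getElem_set_ne (by omega)]

lemma vals01_vset (V : Vis) (y x : Int) (hy : 0 ≤ y) (hx : 0 ≤ x) (h : vget V y x = 0)
    (h01 : vals01 V) : vals01 (vset V y x) := by
  obtain ⟨row, hr, he, hs⟩ := vset_eq_set V y x hy hx h
  rw [hs]
  intro r hrmem v hv
  rcases List.mem_or_eq_of_mem_set hrmem with hrm | rfl
  · exact h01 r hrm v hv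
  · rcases List.mem_or_eq_of_mem_set hv with hvm | rfl
    · have hrowmem : row ∈ V := by
        have := List.getElem?_eq_some_iff.1 hr
        exact this.2 ▸ List.getElem_mem this.1
      exact h01 row hrowmem v hvm
    · right; rfl

-- markList characterisations (l : the freshly marked cells, pairwise distinct, unvisited, in range)
def MarkOK (V : Vis) (l : List Cell) : Prop :=
  l.Nodup ∧ ∀ c ∈ l, vget V c.2 c.1 = 0 ∧ 0 ≤ c.1 ∧ 0 ≤ c.2

lemma markok_tail (V : Vis) (c : Cell) (l : List Cell) (hl : MarkOK V (c :: l)) :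
    MarkOK (vset V c.2 c.1) l := by
  obtain ⟨hnd, hall⟩ := hl
  obtain ⟨h0, h1, h2⟩ := hall c (List.mem_cons_self)
  refine ⟨hnd.of_cons, fun d hd => ?_⟩
  obtain ⟨d0, d1, d2⟩ := hall d (List.mem_cons_of_mem _ hd)
  have hne : d ≠ c := fun he => (List.nodup_cons.1 hnd).1 (he ▸ hd)
  rw [vget_vset V c.2 c.1 h2 h1 h0 d.2 d.1 d2 d1]
  rw [if_neg (fun hh => hne (Prod.ext hh.2 hh.1))]
  exact ⟨d0, d1, d2⟩

lemma vget_markList (V : Vis) (l : List Cell) (hl : MarkOK V l) (y x : Int)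
    (hy : 0 ≤ y) (hx : 0 ≤ x) :
    vget (markList V l) y x = if (x, y) ∈ l then 1 else vget V y x := by
  induction l generalizing V with
  | nil => simp [markList]
  | cons c l ih =>
    obtain ⟨h0, h1, h2⟩ := hl.2 c (List.mem_cons_self)
    have step : markList V (c :: l) = markList (vset V c.2 c.1) l := rfl
    rw [step, ih (vset V c.2 c.1) (markok_tail V c l hl)]
    by_cases hmem : (x, y) ∈ l
    · rw [if_pos hmem, if_pos (List.mem_cons_of_mem _ hmem)]
    · rw [if_neg hmem, vget_vset V c.2 c.1 h2 h1 h0 y x hy hx]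
      by_cases hc : (x, y) = c
      · rw [if_pos ⟨congrArg Prod.snd hc, congrArg Prod.fst hc⟩, if_pos (by simp [hc])]
      · rw [if_neg (fun hh => hc (Prod.ext hh.2 hh.1)), if_neg (by simp [hc, hmem])]

lemma zeros_markList (V : Vis) (l : List Cell) (hl : MarkOK V l) :
    zeros (markList V l) + l.length = zeros V := by
  induction l generalizing V with
  | nil => simp [markList]
  | cons c l ih =>
    obtain ⟨h0, h1, h2⟩ := hl.2 c (List.mem_cons_self)
    have step : markList V (c :: l) = markList (vset V c.2 c.1) l := rfl
    rw [step]
    have h := ih (vset V c.2 c.1) (markok_tail V c l hl)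
    have h2' := zeros_vset_eq V c.2 c.1 h2 h1 h0
    simp only [List.length_cons]
    omega

lemma maplen_markList (V : Vis) (l : List Cell) (hl : MarkOK V l) :
    (markList V l).map List.length = V.map List.length := by
  induction l generalizing V with
  | nil => simp [markList]
  | cons c l ih =>
    obtain ⟨h0, h1, h2⟩ := hl.2 c (List.mem_cons_self)
    have step : markList V (c :: l) = markList (vset V c.2 c.1) l := rfl
    rw [step, ih (vset V c.2 c.1) (markok_tail V c l hl)]
    exact vset_maplen V c.2 c.1 h2 h1 h0

lemma vals01_markList (V : Vis) (l : List Cell) (hl : MarkOK V l) (h01 : vals01 V) :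
    vals01 (markList V l) := by
  induction l generalizing V with
  | nil => simpa [markList] using h01
  | cons c l ih =>
    obtain ⟨h0, h1, h2⟩ := hl.2 c (List.mem_cons_self)
    have step : markList V (c :: l) = markList (vset V c.2 c.1) l := rfl
    rw [step]
    exact ih (vset V c.2 c.1) (markok_tail V c l hl)
      (vals01_vset V c.2 c.1 h2 h1 h0 h01)

lemma okb_vset_ne (maps : List String) (V : Vis) (n m : Cell) (h0 : vget V n.2 n.1 = 0)
    (hn1 : 0 ≤ n.1) (hn2 : 0 ≤ n.2) (hne : m ≠ n) :
    okb maps (vset V n.2 n.1) m.1 m.2 = okb maps V m.1 m.2 := by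
  by_cases hm1 : 0 ≤ m.1
  · by_cases hm2 : 0 ≤ m.2
    · unfold okb
      rw [vget_vset V n.2 n.1 hn2 hn1 h0 m.2 m.1 hm2 hm1,
        if_neg (fun hh => hne (Prod.ext hh.2 hh.1))]
    · unfold okb
      rw [decide_eq_false hm2]
      simp
  · unfold okb
    rw [decide_eq_false hm1]
    simp

-- the inner 4-neighbour fold, in closed form
lemma fold_char (maps : List String) : ∀ (l : List Cell), l.Nodup → ∀ (q0 : List Cell) (V : Vis) (t : Int),
    l.foldl (stepF maps) (q0, V, t) =
      (q0 ++ l.filter (fun n => okb maps V n.1 n.2),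
        markList V (l.filter (fun n => okb maps V n.1 n.2)),
        t + sumVals maps (l.filter (fun n => okb maps V n.1 n.2))) := by
  intro l
  induction l with
  | nil => intro _ q0 V t; simp [markList, sumVals]
  | cons n l ih =>
    intro hnd q0 V t
    simp only [List.foldl_cons]
    by_cases hok : okb maps V n.1 n.2 = true
    · have hstep : stepF maps (q0, V, t) n =
          (q0 ++ [n], vset V n.2 n.1, t + valAt maps n.2 n.1) := by
        simp [stepF, hok]
      rw [hstep, ih (List.nodup_cons.1 hnd).2]
      obtain ⟨⟨ho1, _, ho3, _, _⟩, ho0⟩ := (okb_iff maps V n.1 n.2).1 hok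
      have hfilt : l.filter (fun m => okb maps (vset V n.2 n.1) m.1 m.2) =
          l.filter (fun m => okb maps V m.1 m.2) := by
        apply List.filter_congr
        intro m hm
        exact okb_vset_ne maps V n m ho0 ho1 ho3
          (fun he => (List.nodup_cons.1 hnd).1 (he ▸ hm))
      rw [hfilt]
      simp only [List.filter_cons, hok, if_true, Prod.mk.injEq]
      refine ⟨by simp, rfl, ?_⟩
      simp only [sumVals, List.map_cons, List.sum_cons]
      ring
    · have hstep : stepF maps (q0, V, t) n = (q0, V, t) := by
        simp [stepF, hok]
      rw [hstep, ih (List.nodup_cons.1 hnd).2]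
      simp only [List.filter_cons, hok]
      simp

-- A's inner loop over range(4) with the dx/dy tables is the same fold over the tuples
lemma inner_fold_eq (maps : List String) (a b : Int) (st : List Cell × Vis × Int) :
    (PySem.List.pyRange 0 4 1).foldl (bfsStep maps a b) st = (nbrs a b).foldl (stepF maps) st := by
  have h4 : PySem.List.pyRange 0 4 1 = [0, 1, 2, 3] := by decide
  have d0 : PySem.List.pyGetD dxA (0 : Int) 0 = 0 := by decide
  have d1 : PySem.List.pyGetD dxA (1 : Int) 0 = 0 := by decide
  have d2 : PySem.List.pyGetD dxA (2 : Int) 0 = 1 := by decide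
  have d3 : PySem.List.pyGetD dxA (3 : Int) 0 = -1 := by decide
  have e0 : PySem.List.pyGetD dyA (0 : Int) 0 = 1 := by decide
  have e1 : PySem.List.pyGetD dyA (1 : Int) 0 = -1 := by decide
  have e2 : PySem.List.pyGetD dyA (2 : Int) 0 = 0 := by decide
  have e3 : PySem.List.pyGetD dyA (3 : Int) 0 = 0 := by decide
  rw [h4]
  simp only [List.foldl_cons, List.foldl_nil, nbrs, bfsStep, stepF, d0, d1, d2, d3, e0, e1,
    e2, e3, add_zero, sub_eq_add_neg]

-- Reach facts
lemma reach_nil (maps : List String) (V : Vis) (c : Cell) : ¬ Reach maps V [] c := by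
  intro h
  induction h with
  | base h => simp at h
  | step _ _ _ _ ih => exact ih

lemma reach_of_marked (maps : List String) (V : Vis) (q : List Cell) (c : Cell)
    (h : Reach maps V q c) (hm : vget V c.2 c.1 ≠ 0) : c ∈ q := by
  revert hm
  induction h with
  | base h => intro _; exact h
  | step _ _ _ hu _ => intro hm; exact absurd hu hm

lemma sum_filter_or {α : Type} (f : α → Int) (p q : α → Bool) :
    ∀ (l : List α), (∀ a ∈ l, ¬(p a = true ∧ q a = true)) →
      ((l.filter (fun a => p a || q a)).map f).sum =
        ((l.filter p).map f).sum + ((l.filter q).map f).sum := by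
  intro l
  induction l with
  | nil => intro _; simp
  | cons a l ih =>
    intro hd
    have ih' := ih (fun b hb => hd b (List.mem_cons_of_mem _ hb))
    by_cases hp : p a = true
    · have hq : q a = false := by
        cases hqv : q a
        · rfl
        · exact absurd ⟨hp, hqv⟩ (hd a List.mem_cons_self)
      simp only [List.filter_cons, hp, hq, Bool.true_or, cond_true, cond_false,
        List.map_cons, List.sum_cons, if_pos, if_neg]
      simp only [List.filter_cons, hp, hq] at ih' ⊢
      simp [ih']
      ring
    · have hp' : p a = false := by cases hpv : p a; rfl; exact absurd hpv hp
      by_cases hq : q a = true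
      · simp only [List.filter_cons, hp', hq, Bool.false_or, List.map_cons, List.sum_cons]
        simp [ih']
        ring
      · have hq' : q a = false := by cases hqv : q a; rfl; exact absurd hqv hq
        simp only [List.filter_cons, hp', hq', Bool.false_or]
        simpa using ih'

set_option maxHeartbeats 1000000 in
set_option maxHeartbeats 1000000 in
lemma addSum_step (maps : List String) (V V' Vf : Vis) (new : List Cell)
    (hnew : ∀ c ∈ new, (c ∈ cells maps) ∧ vget V c.2 c.1 = 0)
    (hnd : new.Nodup)
    (hV' : ∀ c : Cell, 0 ≤ c.1 → 0 ≤ c.2 →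
      (vget V' c.2 c.1 = 0 ↔ vget V c.2 c.1 = 0 ∧ c ∉ new))
    (hmono : ∀ c : Cell, 0 ≤ c.1 → 0 ≤ c.2 → vget V' c.2 c.1 ≠ 0 → vget Vf c.2 c.1 ≠ 0) :
    addSum maps V Vf = sumVals maps new + addSum maps V' Vf := by
  have hcong : (cells maps).filter (fun c => (vget V c.2 c.1 == 0) && (vget Vf c.2 c.1 != 0)) =
      (cells maps).filter
        (fun c => (decide (c ∈ new)) || ((vget V' c.2 c.1 == 0) && (vget Vf c.2 c.1 != 0))) := by
    apply List.filter_congr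
    intro c hc
    obtain ⟨hb1, _, hb3, _⟩ := (mem_cells maps c).1 hc
    have hV'c := hV' c hb1 hb3
    have hnotnew : vget V' c.2 c.1 = 0 → c ∉ new := fun hz => (hV'c.1 hz).2
    rw [Bool.eq_iff_iff]
    simp only [Bool.or_eq_true, Bool.and_eq_true, beq_iff_eq, bne_iff_ne, decide_eq_true_eq]
    constructor
    · rintro ⟨hv0, hvf⟩
      by_cases h3 : c ∈ new
      · exact Or.inl h3
      · exact Or.inr ⟨hV'c.2 ⟨hv0, h3⟩, hvf⟩
    · rintro (h3 | ⟨hv0', hvf⟩)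
      · exact ⟨(hnew c h3).2, hmono c hb1 hb3 (fun hz => hnotnew hz h3)⟩
      · exact ⟨(hV'c.1 hv0').1, hvf⟩
  have hdisj : ∀ a ∈ cells maps,
      ¬((decide (a ∈ new) : Bool) = true ∧
        ((vget V' a.2 a.1 == 0) && (vget Vf a.2 a.1 != 0)) = true) := by
    rintro a ha ⟨hm, hrest⟩
    obtain ⟨hb1, _, hb3, _⟩ := (mem_cells maps a).1 ha
    have hm' : a ∈ new := of_decide_eq_true hm
    rw [Bool.and_eq_true] at hrest
    have h0' : vget V' a.2 a.1 = 0 := by simpa using hrest.1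
    exact ((hV' a hb1 hb3).1 h0').2 hm'
  have hperm : ((cells maps).filter (fun c => decide (c ∈ new))).Perm new := by
    rw [List.perm_ext_iff_of_nodup ((nodup_cells maps).filter _) hnd]
    intro a
    simp only [List.mem_filter, decide_eq_true_eq]
    exact ⟨fun h => h.2, fun h => ⟨(hnew a h).1, h⟩⟩
  have hsum1 : (((cells maps).filter (fun c => decide (c ∈ new))).map
      (fun c => valAt maps c.2 c.1)).sum = sumVals maps new := by
    have hp2 := List.Perm.map (fun c : Cell => valAt maps c.2 c.1) hperm
    unfold sumVals
    exact hp2.sum_eq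
  unfold addSum
  rw [hcong, sum_filter_or _ _ _ (cells maps) hdisj, hsum1]

lemma markok_newOf (maps : List String) (V : Vis) (c : Cell) : MarkOK V (newOf maps V c) := by
  refine ⟨(nodup_nbrs c.1 c.2).filter _, fun n hn => ?_⟩
  obtain ⟨_, hok⟩ := List.mem_filter.1 hn
  obtain ⟨⟨h1, _, h3, _, _⟩, h0⟩ := (okb_iff maps V n.1 n.2).1 hok
  exact ⟨h0, h1, h3⟩

lemma mem_newOf (maps : List String) (V : Vis) (c : Cell) (n : Cell) (hn : n ∈ newOf maps V c) :
    n ∈ nbrs c.1 c.2 ∧ elig maps n ∧ vget V n.2 n.1 = 0 ∧ n ∈ cells maps := by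
  obtain ⟨hnb, hok⟩ := List.mem_filter.1 hn
  obtain ⟨he, h0⟩ := (okb_iff maps V n.1 n.2).1 hok
  obtain ⟨h1, h2, h3, h4, _⟩ := id he
  exact ⟨hnb, he, h0, (mem_cells maps n).2 ⟨h1, h2, h3, h4⟩⟩

lemma newOf_subset_reach (maps : List String) (V : Vis) (q : List Cell) (c : Cell)
    (hc : c ∈ q) (d : Cell) (hd : d ∈ newOf maps V c) : Reach maps V q d := by
  obtain ⟨hnb, he, h0, _⟩ := mem_newOf maps V c d hd
  exact Reach.step (Reach.base hc) hnb he h0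

lemma reach_nonneg (maps : List String) (V : Vis) (q : List Cell) (hInv : LoopInv maps V q)
    (d : Cell) (h : Reach maps V q d) : 0 ≤ d.1 ∧ 0 ≤ d.2 := by
  induction h with
  | base hm => obtain ⟨⟨h1, _, h3, _, _⟩, _⟩ := hInv _ hm; exact ⟨h1, h3⟩
  | step _ _ he _ _ => obtain ⟨h1, _, h3, _, _⟩ := he; exact ⟨h1, h3⟩

lemma vget_markList_newOf (maps : List String) (V : Vis) (c : Cell) (y x : Int)
    (hy : 0 ≤ y) (hx : 0 ≤ x) :
    vget (markList V (newOf maps V c)) y x =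
      if (x, y) ∈ newOf maps V c then 1 else vget V y x :=
  vget_markList V (newOf maps V c) (markok_newOf maps V c) y x hy hx

lemma reach_back (maps : List String) (V : Vis) (q : List Cell) (c : Cell) (rest : List Cell)
    (hperm : q.Perm (c :: rest)) (hInv : LoopInv maps V q) (d : Cell)
    (h : Reach maps (markList V (newOf maps V c)) (rest ++ newOf maps V c) d) :
    Reach maps V q d := by
  induction h with
  | base hmem =>
    rcases List.mem_append.1 hmem with hr | hn
    · exact Reach.base (hperm.symm.subset (List.mem_cons_of_mem _ hr))
    · exact newOf_subset_reach maps V q c (hperm.symm.subset List.mem_cons_self) _ hn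
  | step hc hn he hu ih =>
    rename_i e n
    obtain ⟨h1, _, h3, _, _⟩ := id he
    rw [vget_markList_newOf maps V c n.2 n.1 h3 h1] at hu
    by_cases hmem : (n.1, n.2) ∈ newOf maps V c
    · rw [if_pos hmem] at hu; exact absurd hu one_ne_zero
    · rw [if_neg hmem] at hu
      exact Reach.step ih hn he hu

lemma reach_fwd (maps : List String) (V : Vis) (q : List Cell) (c : Cell) (rest : List Cell)
    (hperm : q.Perm (c :: rest)) (hInv : LoopInv maps V q) (d : Cell)
    (h : Reach maps V q d) :
    vget (markList V (newOf maps V c)) d.2 d.1 ≠ 0 ∨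
      Reach maps (markList V (newOf maps V c)) (rest ++ newOf maps V c) d := by
  induction h with
  | base hm =>
    rename_i d0
    rcases List.mem_cons.1 (hperm.subset hm) with hdc | hdr
    · obtain ⟨⟨h1, _, h3, _, _⟩, hmk⟩ := hInv _ hm
      rw [vget_markList_newOf maps V c d0.2 d0.1 h3 h1]
      by_cases hmem : (d0.1, d0.2) ∈ newOf maps V c
      · rw [if_pos hmem]; exact Or.inl one_ne_zero
      · rw [if_neg hmem]; exact Or.inl hmk
    · exact Or.inr (Reach.base (List.mem_append.2 (Or.inl hdr)))
  | step hre hn he hu ih =>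
    rename_i e n
    obtain ⟨h1, _, h3, _, _⟩ := id he
    by_cases hmem : (n.1, n.2) ∈ newOf maps V c
    · rw [vget_markList_newOf maps V c n.2 n.1 h3 h1, if_pos hmem]
      exact Or.inl one_ne_zero
    · have hu' : vget (markList V (newOf maps V c)) n.2 n.1 = 0 := by
        rw [vget_markList_newOf maps V c n.2 n.1 h3 h1, if_neg hmem]
        exact hu
      rcases ih with hme | hre'
      · obtain ⟨he1, he3⟩ := reach_nonneg maps V q hInv _ hre
        rw [vget_markList_newOf maps V c e.2 e.1 he3 he1] at hme
        by_cases hemem : (e.1, e.2) ∈ newOf maps V c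
        · have : e ∈ newOf maps V c := by simpa using hemem
          exact Or.inr (Reach.step (Reach.base (List.mem_append.2 (Or.inr this))) hn he hu')
        · rw [if_neg hemem] at hme
          have heq : e ∈ q := reach_of_marked maps V q e hre hme
          rcases List.mem_cons.1 (hperm.subset heq) with hec | her
          · have hnnew : n ∈ newOf maps V c := by
              rw [← hec]
              exact List.mem_filter.2 ⟨hn, (okb_iff maps V n.1 n.2).2 ⟨he, hu⟩⟩
            exact absurd (by simpa using hnnew) hmem
          · exact Or.inr (Reach.step (Reach.base (List.mem_append.2 (Or.inl her))) hn he hu')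
      · exact Or.inr (Reach.step hre' hn he hu')

-- one worklist step: pop any cell c of q, mark and enqueue its eligible unvisited neighbours
lemma step_transfer (maps : List String) (V : Vis) (q : List Cell) (c : Cell) (rest : List Cell)
    (t : Int) (hperm : q.Perm (c :: rest)) (hInv : LoopInv maps V q) :
    MarkOK V (newOf maps V c)
    ∧ LoopInv maps (markList V (newOf maps V c)) (rest ++ newOf maps V c)
    ∧ zeros (markList V (newOf maps V c)) + (rest ++ newOf maps V c).length + 1 = zeros V + q.length
    ∧ ∀ res : Int × Vis,
        Post maps (markList V (newOf maps V c)) (rest ++ newOf maps V c)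
          (t + sumVals maps (newOf maps V c)) res →
        Post maps V q t res := by
  have hmk := markok_newOf maps V c
  have hcq : c ∈ q := hperm.symm.subset List.mem_cons_self
  have hrq : ∀ d ∈ rest, d ∈ q := fun d hd => hperm.symm.subset (List.mem_cons_of_mem _ hd)
  have hchar : ∀ y x : Int, 0 ≤ y → 0 ≤ x →
      vget (markList V (newOf maps V c)) y x =
        if (x, y) ∈ newOf maps V c then 1 else vget V y x :=
    fun y x hy hx => vget_markList_newOf maps V c y x hy hx
  refine ⟨hmk, ?_, ?_, ?_⟩
  · intro d hd
    rcases List.mem_append.1 hd with hr | hn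
    · obtain ⟨he, hm⟩ := hInv d (hrq d hr)
      obtain ⟨h1, _, h3, _, _⟩ := id he
      refine ⟨he, ?_⟩
      rw [hchar d.2 d.1 h3 h1]
      by_cases hmem : (d.1, d.2) ∈ newOf maps V c
      · rw [if_pos hmem]; exact one_ne_zero
      · rw [if_neg hmem]; exact hm
    · obtain ⟨_, he, _, _⟩ := mem_newOf maps V c d hn
      obtain ⟨h1, _, h3, _, _⟩ := id he
      refine ⟨he, ?_⟩
      rw [hchar d.2 d.1 h3 h1, if_pos (by simpa using hn)]
      exact one_ne_zero
  · have hz := zeros_markList V (newOf maps V c) hmk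
    have hlen := hperm.length_eq
    simp only [List.length_append, List.length_cons] at hlen ⊢
    omega
  · intro res hres
    obtain ⟨P1', P2', P3', P4'⟩ := hres
    refine ⟨?_, P2'.trans (maplen_markList V _ hmk),
      fun h01 => P3' (vals01_markList V _ hmk h01), ?_⟩
    · intro x y hx hy
      rw [P1' x y hx hy]
      constructor
      · rintro ⟨h0', hnr'⟩
        have h0 : vget V y x = 0 ∧ (x, y) ∉ newOf maps V c := by
          rw [hchar y x hy hx] at h0'
          by_cases hmem : (x, y) ∈ newOf maps V c
          · rw [if_pos hmem] at h0'; exact absurd h0' one_ne_zero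
          · rw [if_neg hmem] at h0'; exact ⟨h0', hmem⟩
        refine ⟨h0.1, fun hr => ?_⟩
        rcases reach_fwd maps V q c rest hperm hInv (x, y) hr with hm | hr'
        · rw [hchar y x hy hx, if_neg h0.2] at hm
          exact hm h0.1
        · exact hnr' hr'
      · rintro ⟨h0, hnr⟩
        have hmemn : (x, y) ∉ newOf maps V c :=
          fun hmem => hnr (newOf_subset_reach maps V q c hcq _ hmem)
        refine ⟨?_, fun hr' => hnr (reach_back maps V q c rest hperm hInv _ hr')⟩
        rw [hchar y x hy hx, if_neg hmemn]
        exact h0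
    · have hV'iff : ∀ d : Cell, 0 ≤ d.1 → 0 ≤ d.2 →
          (vget (markList V (newOf maps V c)) d.2 d.1 = 0 ↔
            vget V d.2 d.1 = 0 ∧ d ∉ newOf maps V c) := by
        intro d h1 h3
        rw [hchar d.2 d.1 h3 h1]
        by_cases hmem : d ∈ newOf maps V c
        · rw [if_pos (by simpa using hmem)]
          simp [hmem]
        · rw [if_neg (by simpa using hmem)]
          simp [hmem]
      have hmono : ∀ d : Cell, 0 ≤ d.1 → 0 ≤ d.2 →
          vget (markList V (newOf maps V c)) d.2 d.1 ≠ 0 → vget res.2 d.2 d.1 ≠ 0 :=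
        fun d h1 h3 hne0 h0f => hne0 ((P1' d.1 d.2 h1 h3).1 h0f).1
      rw [P4', addSum_step maps V (markList V (newOf maps V c)) res.2 (newOf maps V c)
        (fun d hd => ⟨(mem_newOf maps V c d hd).2.2.2, (mem_newOf maps V c d hd).2.2.1⟩)
        hmk.1 hV'iff hmono]
      ring

lemma post_nil (maps : List String) (V : Vis) (t : Int) : Post maps V [] t (t, V) := by
  refine ⟨?_, rfl, fun h => h, ?_⟩
  · intro x y hx hy
    constructor
    · intro h0; exact ⟨h0, reach_nil maps V _⟩
    · rintro ⟨h0, _⟩; exact h0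
  · have hfil : (cells maps).filter
        (fun c => (vget V c.2 c.1 == 0) && (vget V c.2 c.1 != 0)) = [] := by
      apply List.filter_eq_nil_iff.2
      intro a _
      by_cases h : vget V a.2 a.1 = 0 <;> simp [h]
    simp [addSum, hfil]

lemma bfsLoop_nil (maps : List String) (V : Vis) (t : Int) : bfsLoop maps [] V t = (t, V) := by
  rw [bfsLoop]

lemma bfsLoop_cons (maps : List String) (a b : Int) (rest : List Cell) (V : Vis) (t : Int) :
    bfsLoop maps ((a, b) :: rest) V t =
      bfsLoop maps (rest ++ newOf maps V (a, b)) (markList V (newOf maps V (a, b)))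
        (t + sumVals maps (newOf maps V (a, b))) := by
  rw [bfsLoop]
  rw [inner_fold_eq maps a b, fold_char maps (nbrs a b) (nodup_nbrs a b) rest V t]
  rfl

lemma bfs_post (maps : List String) : ∀ (n : Nat) (q : List Cell) (V : Vis) (t : Int),
    zeros V + q.length ≤ n → LoopInv maps V q → Post maps V q t (bfsLoop maps q V t) := by
  intro n
  induction n with
  | zero =>
    intro q V t hle hInv
    have hq : q = [] := List.length_eq_zero_iff.1 (by omega)
    subst hq
    rw [bfsLoop_nil]
    exact post_nil maps V t
  | succ n ih =>
    intro q V t hle hInv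
    match q with
    | [] =>
      rw [bfsLoop_nil]
      exact post_nil maps V t
    | (a, b) :: rest =>
      obtain ⟨hmk, hInv', hz, htrans⟩ :=
        step_transfer maps V ((a, b) :: rest) (a, b) rest t (List.Perm.refl _) hInv
      have hle' : zeros (markList V (newOf maps V (a, b))) +
          (rest ++ newOf maps V (a, b)).length ≤ n := by
        omega
      have hpost := ih _ _ (t + sumVals maps (newOf maps V (a, b))) hle' hInv'
      rw [bfsLoop_cons]
      exact htrans _ hpost

-- ===== Part 2: the connectivity relation (reachability over the all-zero grid) =====

def zeroV (maps : List String) : Vis :=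
  (PySem.List.pyRange 0 (gh maps) 1).map
    (fun _ => (PySem.List.pyRange 0 (gw maps) 1).map (fun _ => (0 : Int)))

def ConnA (maps : List String) (c d : Cell) : Prop := Reach maps (zeroV maps) [c] d

lemma vget_zeroV (maps : List String) (y x : Int) (hx : 0 ≤ x) (hxw : x < gw maps)
    (hy : 0 ≤ y) (hyh : y < gh maps) : vget (zeroV maps) y x = 0 := by
  rw [vget_nonneg _ _ _ hy hx]
  have hyl : y.toNat < (zeroV maps).length := by
    simp [zeroV, PySem.List.length_pyRange_one]
    omega
  rw [List.getElem?_eq_getElem hyl]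
  simp only [Option.getD_some, zeroV, List.getElem_map]
  have hxl : x.toNat < ((PySem.List.pyRange 0 (gw maps) 1).map (fun _ => (0 : Int))).length := by
    simp [PySem.List.length_pyRange_one]
    omega
  rw [List.getElem?_eq_getElem hxl]
  simp

lemma conn_refl (maps : List String) (c : Cell) : ConnA maps c c :=
  Reach.base (List.mem_singleton.2 rfl)

lemma conn_step (maps : List String) {c d e : Cell} (h : ConnA maps c d)
    (hn : e ∈ nbrs d.1 d.2) (he : elig maps e) : ConnA maps c e := by
  obtain ⟨h1, h2, h3, h4, _⟩ := id he
  exact Reach.step h hn he (vget_zeroV maps e.2 e.1 h1 h2 h3 h4)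

lemma conn_elig (maps : List String) {c d : Cell} (h : ConnA maps c d) :
    d = c ∨ elig maps d := by
  induction h with
  | base hm => exact Or.inl (List.mem_singleton.1 hm)
  | step _ _ he _ => exact Or.inr he

lemma conn_trans (maps : List String) {c d e : Cell} (h1 : ConnA maps c d)
    (h2 : ConnA maps d e) : ConnA maps c e := by
  induction h2 with
  | base hm => rw [List.mem_singleton.1 hm]; exact h1
  | step _ hn he _ ih => exact conn_step maps ih hn he

lemma nbrs_symm {d : Cell} {a b : Int} (h : d ∈ nbrs a b) : (a, b) ∈ nbrs d.1 d.2 := by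
  obtain ⟨dx, dy⟩ := d
  simp only [nbrs, List.mem_cons, List.mem_singleton, Prod.mk.injEq, List.not_mem_nil, or_false] at h ⊢
  rcases h with ⟨h1, h2⟩ | ⟨h1, h2⟩ | ⟨h1, h2⟩ | ⟨h1, h2⟩ <;> subst h1 <;> subst h2 <;> simp <;> omega

lemma conn_symm (maps : List String) {c d : Cell} (hc : elig maps c) (h : ConnA maps c d) :
    ConnA maps d c := by
  induction h with
  | base hm => rw [List.mem_singleton.1 hm]; exact conn_refl maps c
  | step hcd hn he hu ih =>
    rename_i e n
    have helige : elig maps e := by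
      rcases conn_elig maps hcd with rfl | h'
      · exact hc
      · exact h'
    exact conn_trans maps (conn_step maps (conn_refl maps n) (nbrs_symm hn) helige) ih

-- a visited grid whose marked set is a union of whole components
def ClosedV (maps : List String) (V : Vis) : Prop :=
  ∀ c : Cell, elig maps c → vget V c.2 c.1 ≠ 0 →
    ∀ e ∈ nbrs c.1 c.2, elig maps e → vget V e.2 e.1 ≠ 0

lemma comp_unvisited (maps : List String) (V : Vis) (s : Cell) (hcl : ClosedV maps V)
    (hs : elig maps s) (h0 : vget V s.2 s.1 = 0) {d : Cell} (h : ConnA maps s d) :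
    vget V d.2 d.1 = 0 := by
  induction h with
  | base hm => rw [List.mem_singleton.1 hm]; exact h0
  | step hcd hn he hu ih =>
    rename_i e n
    have helige : elig maps e := by
      rcases conn_elig maps hcd with rfl | h'
      · exact hs
      · exact h'
    by_contra hnz
    exact absurd ih (hcl n he hnz (e.1, e.2) (nbrs_symm hn) helige)

-- ===== Part 3: what one bfs call does, for a component-closed visited grid =====

lemma reach_to_conn (maps : List String) (V : Vis) (s : Cell) {d : Cell}
    (h : Reach maps (vset V s.2 s.1) [s] d) : ConnA maps s d := by
  induction h with
  | base hm => rw [List.mem_singleton.1 hm]; exact conn_refl maps s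
  | step _ hn he _ ih => exact conn_step maps ih hn he

lemma conn_to_reach (maps : List String) (V : Vis) (s : Cell) (hs : elig maps s)
    (h0 : vget V s.2 s.1 = 0) (hcl : ClosedV maps V) {d : Cell} (h : ConnA maps s d) :
    Reach maps (vset V s.2 s.1) [s] d := by
  obtain ⟨hs1, hs2, hs3, hs4, _⟩ := id hs
  induction h with
  | base hm => exact Reach.base hm
  | step hcd hn he hu ih =>
    rename_i e n
    by_cases hns : n = s
    · subst hns; exact Reach.base (List.mem_singleton.2 rfl)
    · obtain ⟨h1, _, h3, _, _⟩ := id he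
      have hconn : ConnA maps s n := conn_step maps hcd hn he
      have hVn : vget V n.2 n.1 = 0 := comp_unvisited maps V s hcl hs h0 hconn
      have hV'n : vget (vset V s.2 s.1) n.2 n.1 = 0 := by
        rw [vget_vset V s.2 s.1 hs3 hs1 h0 n.2 n.1 h3 h1,
          if_neg (fun hh => hns (Prod.ext hh.2 hh.1))]
        exact hVn
      exact Reach.step ih hn he hV'n

set_option maxHeartbeats 1000000 in
lemma bfsA_char (maps : List String) (V : Vis) (s : Cell) (hs : elig maps s)
    (h0 : vget V s.2 s.1 = 0) (hcl : ClosedV maps V) (pconn : Cell → Bool)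
    (hp : ∀ c, c ∈ cells maps → (pconn c = true ↔ ConnA maps s c)) :
    (∀ x y : Int, 0 ≤ x → x < gw maps → 0 ≤ y → y < gh maps →
      (vget (bfsA maps s.1 s.2 V).2 y x ≠ 0 ↔ vget V y x ≠ 0 ∨ ConnA maps s (x, y)))
    ∧ (bfsA maps s.1 s.2 V).2.map List.length = V.map List.length
    ∧ (vals01 V → vals01 (bfsA maps s.1 s.2 V).2)
    ∧ (bfsA maps s.1 s.2 V).1 = valAt maps s.2 s.1 +
        (((cells maps).filter (fun c => pconn c && (c != s))).map
          (fun c => valAt maps c.2 c.1)).sum := by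
  obtain ⟨hs1, hs2, hs3, hs4, _⟩ := id hs
  have hm1 : vget (vset V s.2 s.1) s.2 s.1 = 1 := by
    rw [vget_vset V s.2 s.1 hs3 hs1 h0 s.2 s.1 hs3 hs1, if_pos ⟨rfl, rfl⟩]
  have hInv : LoopInv maps (vset V s.2 s.1) [s] := by
    intro d hd
    rw [List.mem_singleton.1 hd]
    exact ⟨hs, by rw [hm1]; norm_num⟩
  have hbfs : bfsA maps s.1 s.2 V =
      bfsLoop maps [(s.1, s.2)] (vset V s.2 s.1) (valAt maps s.2 s.1) := rfl
  have hsp : ((s.1, s.2) : Cell) = s := rfl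
  obtain ⟨P1, P2, P3, P4⟩ := bfs_post maps (zeros (vset V s.2 s.1) + 1) [s]
    (vset V s.2 s.1) (valAt maps s.2 s.1) (by simp) hInv
  rw [hbfs, hsp]
  have hV'char : ∀ x y : Int, 0 ≤ x → 0 ≤ y →
      vget (vset V s.2 s.1) y x = if (x, y) = s then 1 else vget V y x := by
    intro x y hx hy
    rw [vget_vset V s.2 s.1 hs3 hs1 h0 y x hy hx]
    by_cases hq : ((x, y) : Cell) = s
    · rw [if_pos ⟨congrArg Prod.snd hq, congrArg Prod.fst hq⟩, if_pos hq]
    · rw [if_neg (fun hh => hq (Prod.ext hh.2 hh.1)), if_neg hq]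
  refine ⟨?_, P2.trans (vset_maplen V s.2 s.1 hs3 hs1 h0),
    fun h01 => P3 (vals01_vset V s.2 s.1 hs3 hs1 h0 h01), ?_⟩
  · intro x y hx hxw hy hyh
    have h1 := P1 x y hx hy
    constructor
    · intro hnz
      have hh : ¬ (vget (vset V s.2 s.1) y x = 0 ∧
          ¬ Reach maps (vset V s.2 s.1) [s] (x, y)) := fun hh => hnz (h1.2 hh)
      rcases not_and_or.1 hh with hV' | hR
      · rw [hV'char x y hx hy] at hV'
        by_cases hq : ((x, y) : Cell) = s
        · exact Or.inr (hq ▸ conn_refl maps s)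
        · rw [if_neg hq] at hV'
          exact Or.inl hV'
      · exact Or.inr (reach_to_conn maps V s (not_not.1 hR))
    · intro hor
      intro hz
      obtain ⟨hV'0, hnR⟩ := h1.1 hz
      rcases hor with hV | hC
      · rw [hV'char x y hx hy] at hV'0
        by_cases hq : ((x, y) : Cell) = s
        · rw [if_pos hq] at hV'0; exact one_ne_zero hV'0
        · rw [if_neg hq] at hV'0; exact hV hV'0
      · exact hnR (conn_to_reach maps V s hs h0 hcl hC)
  · rw [P4]
    congr 1
    unfold addSum
    congr 1
    congr 1
    apply List.filter_congr
    intro c hc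
    obtain ⟨hc1, hc2, hc3, hc4⟩ := (mem_cells maps c).1 hc
    have hcV' := hV'char c.1 c.2 hc1 hc3
    rw [Bool.eq_iff_iff]
    simp only [Bool.and_eq_true, beq_iff_eq, bne_iff_ne, ne_eq, decide_eq_true_eq]
    have hPc := P1 c.1 c.2 hc1 hc3
    constructor
    · rintro ⟨hv0, hvf⟩
      have hcs : ¬ c = s := by
        intro hcs
        rw [hcV', if_pos (by rw [← hcs])] at hv0
        exact one_ne_zero hv0
      have hR : Reach maps (vset V s.2 s.1) [s] (c.1, c.2) := by
        by_contra hnR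
        exact hvf (hPc.2 ⟨hv0, hnR⟩)
      exact ⟨(hp c hc).2 (reach_to_conn maps V s hR), hcs⟩
    · rintro ⟨hpc, hcs⟩
      have hC : ConnA maps s c := (hp c hc).1 hpc
      have hv0 : vget (vset V s.2 s.1) c.2 c.1 = 0 := by
        rw [hcV', if_neg (by intro hh; exact hcs (by rw [← hh]))]
        exact comp_unvisited maps V s hcl hs h0 hC
      refine ⟨hv0, fun hz => ?_⟩
      exact (hPc.1 hz).2 (conn_to_reach maps V s hs h0 hcl hC)

-- ===== Part 4: the label dict of port B (invariant, termination of the fuel, fixpoint) =====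

def swapC (p : Cell) : Cell := (p.2, p.1)

def ConnR (maps : List String) (p q : Cell) : Prop := ConnA maps (swapC p) (swapC q)

lemma swap_swap (p : Cell) : swapC (swapC p) = p := rfl

lemma mem_landB (maps : List String) (p : Cell) :
    p ∈ landB maps ↔ elig maps (swapC p) := by
  obtain ⟨r, c⟩ := p
  simp only [landB, List.mem_flatMap, List.mem_map, List.mem_filter,
    PySem.List.mem_pyRange_one, swapC, elig, elig0, Prod.mk.injEq]
  constructor
  · rintro ⟨r', hr', c', ⟨hc', hX⟩, rfl, rfl⟩
    exact ⟨hc'.1, hc'.2, hr'.1, hr'.2, by simpa using hX⟩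
  · rintro ⟨h1, h2, h3, h4, h5⟩
    exact ⟨r, ⟨h3, h4⟩, c, ⟨⟨h1, h2⟩, by simpa using h5⟩, rfl, rfl⟩

lemma mem_nbrsB_iff (p q : Cell) : q ∈ nbrsB p ↔ swapC q ∈ nbrs (swapC p).1 (swapC p).2 := by
  obtain ⟨r, c⟩ := p
  obtain ⟨r', c'⟩ := q
  simp only [nbrsB, nbrs, swapC, List.mem_cons, List.mem_singleton, List.not_mem_nil, or_false,
    Prod.mk.injEq]
  omega

lemma connR_refl (maps : List String) (p : Cell) : ConnR maps p p := conn_refl maps _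

lemma connR_trans (maps : List String) {p q r : Cell} (h1 : ConnR maps p q)
    (h2 : ConnR maps q r) : ConnR maps p r := conn_trans maps h1 h2

lemma connR_symm (maps : List String) {p q : Cell} (hp : p ∈ landB maps)
    (h : ConnR maps p q) : ConnR maps q p :=
  conn_symm maps ((mem_landB maps p).1 hp) h

lemma connR_nbr (maps : List String) {p q : Cell} (hp : p ∈ landB maps)
    (hq : q ∈ landB maps) (hn : q ∈ nbrsB p) : ConnR maps p q :=
  conn_step maps (conn_refl maps (swapC p)) ((mem_nbrsB_iff p q).1 hn)
    ((mem_landB maps q).1 hq)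

lemma idx_lt {a b c d w : Int} (hab : a < b) (hc : 0 ≤ c) (hcw : c < w) (hd : 0 ≤ d) :
    a * w + c < b * w + d := by
  have hw : 0 < w := lt_of_le_of_lt hc hcw
  have h1 : (a + 1) * w ≤ b * w := mul_le_mul_of_nonneg_right (by omega) (le_of_lt hw)
  nlinarith

lemma idxB_nonneg (maps : List String) {p : Cell} (hp : p ∈ landB maps) :
    0 ≤ idxB maps p := by
  have h := (mem_landB maps p).1 hp
  obtain ⟨h1, h2, h3, h4, _⟩ := h
  simp only [swapC] at h1 h2 h3 h4
  have hmul : (0 : Int) ≤ p.1 * gw maps := mul_nonneg h3 (by omega)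
  unfold idxB
  omega

lemma idxB_inj (maps : List String) {p q : Cell} (hp : p ∈ landB maps) (hq : q ∈ landB maps)
    (h : idxB maps p = idxB maps q) : p = q := by
  obtain ⟨hp1, hp2, hp3, hp4, _⟩ := (mem_landB maps p).1 hp
  obtain ⟨hq1, hq2, hq3, hq4, _⟩ := (mem_landB maps q).1 hq
  simp only [swapC] at hp1 hp2 hp3 hp4 hq1 hq2 hq3 hq4
  unfold idxB at h
  have hrc : p.1 = q.1 := by
    rcases lt_trichotomy p.1 q.1 with hlt | heq | hgt
    · exact absurd h (ne_of_lt (idx_lt hlt hp1 hp2 hq1))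
    · exact heq
    · exact absurd h.symm (ne_of_lt (idx_lt hgt hq1 hq2 hp1))
  have : p.2 = q.2 := by rw [hrc] at h; omega
  exact Prod.ext hrc this

lemma pairwise_landB (maps : List String) :
    (landB maps).Pairwise (fun p q => idxB maps p < idxB maps q) := by
  unfold landB
  rw [List.pairwise_flatMap]
  constructor
  · intro r _
    apply List.Pairwise.map
    · intro c1 c2 h
      exact h
    · apply List.Pairwise.filter
      apply (PySem.List.pairwise_lt_pyRange_one 0 (gw maps)).imp
      intro c1 c2 hlt
      simp only [idxB]
      omega
  · apply (PySem.List.pairwise_lt_pyRange_one 0 (gh maps)).imp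
    intro r1 r2 hlt x hx y hy
    simp only [List.mem_map, List.mem_filter, PySem.List.mem_pyRange_one] at hx hy
    obtain ⟨c1, ⟨⟨hc1a, hc1b⟩, _⟩, rfl⟩ := hx
    obtain ⟨c2, ⟨⟨hc2a, hc2b⟩, _⟩, rfl⟩ := hy
    simp only [idxB]
    exact idx_lt hlt hc1a hc1b hc2a

lemma nodup_landB (maps : List String) : (landB maps).Nodup := by
  apply (pairwise_landB maps).imp
  intro p q h
  intro he
  rw [he] at h
  omega

-- the invariant carried through the sweeps
def GoodL (maps : List String) (L : LDict) : Prop :=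
  L.keys = landB maps ∧
  ∀ p ∈ landB maps, ∃ e ∈ landB maps, ConnR maps p e ∧ L.get? p = some (idxB maps e) ∧
    idxB maps e ≤ idxB maps p

lemma minFold_char (L : LDict) (qs : List Cell) : ∀ (m0 : Int),
    minFold L qs m0 ≤ m0
    ∧ (∀ q ∈ qs, L.contains q = true → minFold L qs m0 ≤ L.getD q 0)
    ∧ (minFold L qs m0 = m0 ∨ ∃ q ∈ qs, L.contains q = true ∧ minFold L qs m0 = L.getD q 0) := by
  induction qs with
  | nil => intro m0; exact ⟨le_refl _, by simp, Or.inl rfl⟩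
  | cons q qs ih =>
    intro m0
    have hstep : minFold L (q :: qs) m0 =
        minFold L qs (if L.contains q && decide (L.getD q 0 < m0) then L.getD q 0 else m0) := rfl
    by_cases hc : (L.contains q && decide (L.getD q 0 < m0)) = true
    · obtain ⟨hcq, hlt⟩ := Bool.and_eq_true .. ▸ hc
      have hlt' : L.getD q 0 < m0 := of_decide_eq_true hlt
      rw [hstep, if_pos hc]
      obtain ⟨ha, hb, hcc⟩ := ih (L.getD q 0)
      refine ⟨le_trans ha (le_of_lt hlt'), ?_, ?_⟩
      · intro q' hq' hcq'
        rcases List.mem_cons.1 hq' with rfl | hmem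
        · exact ha
        · exact hb q' hmem hcq'
      · rcases hcc with heq | ⟨q', hq', hcq', heq⟩
        · exact Or.inr ⟨q, List.mem_cons_self, hcq, heq⟩
        · exact Or.inr ⟨q', List.mem_cons_of_mem _ hq', hcq', heq⟩
    · rw [hstep, if_neg hc]
      obtain ⟨ha, hb, hcc⟩ := ih m0
      refine ⟨ha, ?_, ?_⟩
      · intro q' hq' hcq'
        rcases List.mem_cons.1 hq' with rfl | hmem
        · have : ¬ (L.getD q' 0 < m0) := by
            intro hlt
            exact hc (by rw [hcq', decide_eq_true hlt]; rfl)
          omega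
        · exact hb q' hmem hcq'
      · rcases hcc with heq | ⟨q', hq', hcq', heq⟩
        · exact Or.inl heq
        · exact Or.inr ⟨q', List.mem_cons_of_mem _ hq', hcq', heq⟩

lemma sum_toNat_replace (k : Cell) (v v0 : Int) :
    ∀ (l : List (Cell × Int)), (l.map Prod.fst).Nodup → (k, v0) ∈ l →
      ((l.map (fun p => if p.1 == k then (k, v) else p)).map (fun p => p.2.toNat)).sum + v0.toNat
        = (l.map (fun p => p.2.toNat)).sum + v.toNat := by
  intro l
  induction l with
  | nil => intro _ h; simp at h
  | cons a l ih =>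
    intro hnd hmem
    by_cases hk : a.1 = k
    · have ha : a = (k, v0) := by
        rcases List.mem_cons.1 hmem with h | h
        · exact h.symm
        · exfalso
          have : k ∈ l.map Prod.fst := List.mem_map.2 ⟨(k, v0), h, rfl⟩
          rw [List.map_cons, List.nodup_cons, hk] at hnd
          exact hnd.1 this
      subst ha
      simp only [List.map_cons, List.sum_cons, beq_self_eq_true, ite_true]
      have hrest : l.map (fun p => if p.1 == k then (k, v) else p) = List.map id l := by
        apply List.map_congr_left
        intro p hp
        have hne : p.1 ≠ k := by
          intro he
          have hm : k ∈ l.map Prod.fst := List.mem_map.2 ⟨p, hp, he⟩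
          have hnd1 : k ∉ l.map Prod.fst := by
            rw [List.map_cons, List.nodup_cons] at hnd
            exact hnd.1
          exact hnd1 hm
        rw [if_neg (by simpa using hne)]
        rfl
      rw [hrest, List.map_id]
      omega
    · have hmem' : (k, v0) ∈ l := by
        rcases List.mem_cons.1 hmem with h | h
        · exact absurd (congrArg Prod.fst h.symm) hk
        · exact h
      have hnd' : (l.map Prod.fst).Nodup := (List.map_cons .. ▸ hnd).of_cons
      have hih := ih hnd' hmem'
      simp only [List.map_cons, List.sum_cons]
      have ha' : (if (a.1 == k) = true then (k, v) else a) = a := if_neg (by simpa using hk)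
      rw [ha']
      omega

lemma muL_insert (L : LDict) (k : Cell) (v v0 : Int) (hnd : L.keys.Nodup)
    (hget : L.get? k = some v0) :
    muL (L.insert k v) + v0.toNat = muL L + v.toNat := by
  have hcont : L.contains k = true := by
    rw [PySem.Dict.contains_eq_isSome_get?, hget]
    rfl
  have hmem : (k, v0) ∈ L.items := PySem.Dict.mem_items_of_get?_eq_some (d := L) hget
  have hitems := PySem.Dict.items_insert_of_contains L v hcont
  unfold muL
  simp only [PySem.Dict.values, hitems, List.map_map]
  have := sum_toNat_replace k v v0 L.items hnd hmem
  simpa [List.map_map, Function.comp] using this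

-- the per-sweep bookkeeping: the invariant holds, the label total never grows, it strictly
-- drops as soon as the changed flag is set, and an unchanged sweep leaves the dict untouched
def SInv (maps : List String) (L0 : LDict) (st : LDict × Bool) : Prop :=
  GoodL maps st.1 ∧ muL st.1 ≤ muL L0 ∧ (st.2 = true → muL st.1 < muL L0) ∧
    (st.2 = false → st.1 = L0)

lemma sweepStep_inv (maps : List String) (L0 : LDict) (st : LDict × Bool) (p : Cell)
    (hp : p ∈ landB maps) (h : SInv maps L0 st) : SInv maps L0 (sweepStep st p) := by
  obtain ⟨⟨hkeys, hgood⟩, hle, hlt, hid⟩ := h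
  have hndk : st.1.keys.Nodup := hkeys ▸ nodup_landB maps
  obtain ⟨ep, hepmem, hepconn, hepget, heple⟩ := hgood p hp
  have hm0 : st.1.getD p 0 = idxB maps ep := PySem.Dict.getD_of_get?_eq_some _ 0 hepget
  by_cases hcond : minFold st.1 (nbrsB p) (st.1.getD p 0) < st.1.getD p 0
  · have hstep : sweepStep st p = (st.1.insert p (minFold st.1 (nbrsB p) (st.1.getD p 0)), true) := by
      simp only [sweepStep]
      rw [if_pos hcond]
    obtain ⟨hfa, hfb, hfc⟩ := minFold_char st.1 (nbrsB p) (st.1.getD p 0)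
    rcases hfc with heq | ⟨q, hqn, hqc, heq⟩
    · omega
    · have hqmem : q ∈ landB maps := by
        rw [← hkeys]
        exact (PySem.Dict.contains_iff_mem_keys _ _).1 hqc
      obtain ⟨eq', heqmem, heqconn, heqget, heqle⟩ := hgood q hqmem
      have hmq : st.1.getD q 0 = idxB maps eq' := PySem.Dict.getD_of_get?_eq_some _ 0 heqget
      have hconnpq : ConnR maps p q := connR_nbr maps hp hqmem hqn
      have hconnpe : ConnR maps p eq' := connR_trans maps hconnpq heqconn
      have hnewgood : GoodL maps (st.1.insert p (minFold st.1 (nbrsB p) (st.1.getD p 0))) := by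
        constructor
        · rw [PySem.Dict.keys_insert_of_contains _ _
            (by rw [PySem.Dict.contains_iff_mem_keys _ _, hkeys]; exact hp)]
          exact hkeys
        · intro p' hp'
          by_cases hpp : p' = p
          · subst hpp
            refine ⟨eq', heqmem, hconnpe, ?_, ?_⟩
            · rw [PySem.Dict.get?_insert_self, heq, hmq]
            · rw [heq, hmq] at hcond
              rw [hm0] at hcond
              omega
          · obtain ⟨e', he'mem, he'conn, he'get, he'le⟩ := hgood p' hp'
            exact ⟨e', he'mem, he'conn, by rw [PySem.Dict.get?_insert_of_ne _ _ hpp]; exact he'get, he'le⟩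
      have hmu := muL_insert st.1 p (minFold st.1 (nbrsB p) (st.1.getD p 0)) (idxB maps ep) hndk
        (by exact hepget)
      have hnn : 0 ≤ minFold st.1 (nbrsB p) (st.1.getD p 0) := by
        rw [heq, hmq]
        exact idxB_nonneg maps heqmem
      have hmlt : minFold st.1 (nbrsB p) (st.1.getD p 0) < idxB maps ep := by
        rw [← hm0]; exact hcond
      have hnnp : (0 : Int) ≤ idxB maps ep := idxB_nonneg maps hepmem
      have hmuLt : muL (st.1.insert p (minFold st.1 (nbrsB p) (st.1.getD p 0))) < muL st.1 := by
        omega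
      rw [hstep]
      exact ⟨hnewgood, by dsimp only; omega, fun _ => by dsimp only; omega, by simp⟩
  · have hstep : sweepStep st p = st := by
      simp only [sweepStep]
      rw [if_neg hcond]
    rw [hstep]
    exact ⟨⟨hkeys, hgood⟩, hle, hlt, hid⟩

lemma foldl_sweep_inv (maps : List String) (L0 : LDict) :
    ∀ (l : List Cell), (∀ p ∈ l, p ∈ landB maps) → ∀ st, SInv maps L0 st →
      SInv maps L0 (l.foldl sweepStep st) := by
  intro l
  induction l with
  | nil => intro _ st h; exact h
  | cons p l ih =>
    intro hsub st h
    exact ih (fun q hq => hsub q (List.mem_cons_of_mem _ hq)) _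
      (sweepStep_inv maps L0 st p (hsub p List.mem_cons_self) h)

lemma sweep_inv (maps : List String) (L0 : LDict) (h : GoodL maps L0) :
    SInv maps L0 (sweep maps L0) :=
  foldl_sweep_inv maps L0 (landB maps) (fun _ hq => hq) (L0, false)
    ⟨h, le_refl _, by simp, fun _ => rfl⟩

lemma flag_mono : ∀ (l : List Cell) (st : LDict × Bool), st.2 = true →
    (l.foldl sweepStep st).2 = true := by
  intro l
  induction l with
  | nil => intro st h; exact h
  | cons p l ih =>
    intro st h
    apply ih
    simp only [sweepStep]
    split
    · rfl
    · exact h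

lemma sweep_false_pointwise : ∀ (l : List Cell) (L : LDict),
    (l.foldl sweepStep (L, false)).2 = false →
    ∀ p ∈ l, ¬ (minFold L (nbrsB p) (L.getD p 0) < L.getD p 0) := by
  intro l
  induction l with
  | nil => intro L _ p hp; simp at hp
  | cons q l ih =>
    intro L hfl p hp
    by_cases hcond : minFold L (nbrsB q) (L.getD q 0) < L.getD q 0
    · exfalso
      have hstep : sweepStep (L, false) q = (L.insert q (minFold L (nbrsB q) (L.getD q 0)), true) := by
        simp only [sweepStep]
        rw [if_pos hcond]
      rw [List.foldl_cons, hstep] at hfl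
      rw [flag_mono l _ rfl] at hfl
      simp at hfl
    · have hstep : sweepStep (L, false) q = (L, false) := by
        simp only [sweepStep]
        rw [if_neg hcond]
      rw [List.foldl_cons, hstep] at hfl
      rcases List.mem_cons.1 hp with rfl | hmem
      · exact hcond
      · exact ih L hfl p hmem

lemma labelLoop_spec (maps : List String) : ∀ (n : Nat) (L : LDict), GoodL maps L →
    muL L < n → GoodL maps (labelLoop maps n L) ∧ (sweep maps (labelLoop maps n L)).2 = false := by
  intro n
  induction n with
  | zero => intro L _ h; omega
  | succ n ih =>
    intro L hg hlt
    obtain ⟨hg', hle', hlt', hid'⟩ := sweep_inv maps L hg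
    by_cases hch : (sweep maps L).2 = true
    · have hloop : labelLoop maps (n + 1) L = labelLoop maps n (sweep maps L).1 := by
        simp only [labelLoop]
        rw [if_pos hch]
      rw [hloop]
      exact ih (sweep maps L).1 hg' (by have := hlt' hch; omega)
    · have hch' : (sweep maps L).2 = false := by
        cases hv : (sweep maps L).2
        · rfl
        · exact absurd hv hch
      have hloop : labelLoop maps (n + 1) L = (sweep maps L).1 := by
        simp only [labelLoop]
        rw [if_neg hch]
      rw [hloop, hid' hch']
      exact ⟨hg, hch'⟩

lemma good_label0 (maps : List String) : GoodL maps (label0 maps) := by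
  have hfresh : ∀ p ∈ landB maps, (PySem.Dict.empty : LDict).contains p = false := by
    intro p _
    exact PySem.Dict.contains_empty p
  have hnd : ((landB maps).map id).Nodup := by
    rw [List.map_id]
    exact nodup_landB maps
  have hitems : (label0 maps).items =
      (landB maps).map (fun p => (p, idxB maps p)) := by
    unfold label0
    have := PySem.Dict.items_foldl_insert_fresh (landB maps) id (fun p => idxB maps p)
      PySem.Dict.empty hfresh hnd
    simpa using this
  have hkeys : (label0 maps).keys = landB maps := by
    unfold PySem.Dict.keys
    rw [hitems, List.map_map]
    exact List.map_id _
  refine ⟨hkeys, fun p hp => ⟨p, hp, connR_refl maps p, ?_, le_refl _⟩⟩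
  apply PySem.Dict.get?_of_mem_items
  · rw [hitems]
    exact List.mem_map.2 ⟨p, hp, rfl⟩
  · rw [hkeys]
    exact nodup_landB maps

-- the fixpoint property at exit: no label exceeds a neighbour's label
def FixL (maps : List String) (L : LDict) : Prop :=
  ∀ p ∈ landB maps, ∀ q ∈ nbrsB p, L.contains q = true → L.getD p 0 ≤ L.getD q 0

lemma labels_good (maps : List String) : GoodL maps (labelsB maps) ∧ FixL maps (labelsB maps) := by
  obtain ⟨hg, hfl⟩ := labelLoop_spec maps (muL (label0 maps) + 1) (label0 maps)
    (good_label0 maps) (by omega)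
  refine ⟨hg, ?_⟩
  intro p hp q hq hc
  have hpw := sweep_false_pointwise (landB maps) (labelsB maps) hfl p hp
  obtain ⟨hfa, hfb, _⟩ := minFold_char (labelsB maps) (nbrsB p) ((labelsB maps).getD p 0)
  have heq : minFold (labelsB maps) (nbrsB p) ((labelsB maps).getD p 0) =
      (labelsB maps).getD p 0 := le_antisymm hfa (by omega)
  rw [← heq]
  exact hfb q hq hc

-- the root of a land cell
def rootD (maps : List String) (p : Cell) : Int := (labelsB maps).getD p 0

lemma label_const (maps : List String) : ∀ {p q : Cell}, p ∈ landB maps →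
    ConnR maps p q → rootD maps p = rootD maps q := by
  intro p q hp hconn
  obtain ⟨⟨hkeys, _⟩, hfix⟩ := labels_good maps
  have hcont : ∀ r ∈ landB maps, (labelsB maps).contains r = true := by
    intro r hr
    rw [PySem.Dict.contains_iff_mem_keys _ _, hkeys]
    exact hr
  unfold ConnR at hconn
  have main : ∀ d : Cell, Reach maps (zeroV maps) [swapC p] d →
      rootD maps (swapC d) = rootD maps p := by
    intro d hd
    induction hd with
    | base hm =>
      rw [List.mem_singleton.1 hm]
      rfl
    | step hcd hn he hu ih =>
      rename_i e n
      have helige : elig maps e := by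
        rcases conn_elig maps hcd with rfl | h'
        · exact (mem_landB maps p).1 hp
        · exact h'
      have hemem : swapC e ∈ landB maps := (mem_landB maps (swapC e)).2 (by
        rw [swap_swap]; exact helige)
      have hnmem : swapC n ∈ landB maps := (mem_landB maps (swapC n)).2 (by
        rw [swap_swap]; exact he)
      have hn1 : swapC n ∈ nbrsB (swapC e) := by
        rw [mem_nbrsB_iff, swap_swap, swap_swap]
        exact hn
      have hn2 : swapC e ∈ nbrsB (swapC n) := by
        rw [mem_nbrsB_iff, swap_swap, swap_swap]
        exact nbrs_symm hn
      have h1 := hfix (swapC e) hemem (swapC n) hn1 (hcont _ hnmem)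
      have h2 := hfix (swapC n) hnmem (swapC e) hn2 (hcont _ hemem)
      have : rootD maps (swapC n) = rootD maps (swapC e) := le_antisymm h2 h1
      rw [this, ih]
  have hmain := main (swapC q) hconn
  rw [swap_swap] at hmain
  exact hmain.symm

lemma root_mem (maps : List String) {p : Cell} (hp : p ∈ landB maps) :
    ∃ e ∈ landB maps, ConnR maps p e ∧ rootD maps p = idxB maps e ∧
      rootD maps e = idxB maps e ∧ idxB maps e ≤ idxB maps p := by
  obtain ⟨⟨hkeys, hgood⟩, _⟩ := labels_good maps
  obtain ⟨e, hemem, heconn, heget, hele⟩ := hgood p hp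
  have hroot : rootD maps p = idxB maps e := PySem.Dict.getD_of_get?_eq_some _ 0 heget
  have hconst : rootD maps e = rootD maps p :=
    (label_const maps hp heconn).symm
  exact ⟨e, hemem, heconn, hroot, by rw [hconst, hroot], hele⟩

lemma conn_of_root_eq (maps : List String) {p q : Cell} (hp : p ∈ landB maps)
    (hq : q ∈ landB maps) (h : rootD maps p = rootD maps q) : ConnR maps p q := by
  obtain ⟨ep, hepmem, hepconn, heproot, _, _⟩ := root_mem maps hp
  obtain ⟨eq', heqmem, heqconn, heqroot, _, _⟩ := root_mem maps hq
  have : idxB maps ep = idxB maps eq' := by rw [← heproot, ← heqroot, h]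
  have heq : ep = eq' := idxB_inj maps hepmem heqmem this
  subst heq
  exact connR_trans maps hepconn (connR_symm maps hq heqconn)

lemma root_le (maps : List String) {p q : Cell} (hp : p ∈ landB maps)
    (hq : q ∈ landB maps) (hconn : ConnR maps p q) : rootD maps p ≤ idxB maps q := by
  obtain ⟨e, hemem, heconn, heroot, _, hele⟩ := root_mem maps hq
  rw [label_const maps hp hconn, heroot]
  exact hele

-- ===== Part 5: the grouping pass of port B =====

def minCells (maps : List String) : List Cell :=
  (landB maps).filter (fun p => rootD maps p == idxB maps p)

def sumOfRoot (maps : List String) (r : Int) : Int :=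
  (((landB maps).filter (fun q => rootD maps q == r)).map (fun q => valAt maps q.1 q.2)).sum

def compSumB (maps : List String) (p : Cell) : Int := sumOfRoot maps (rootD maps p)

lemma getD_foldl_insert_add (k : Cell → Int) (v : Cell → Int) :
    ∀ (l : List Cell) (d : PySem.Dict Int Int) (r : Int),
      (l.foldl (fun s p => s.insert (k p) (s.getD (k p) 0 + v p)) d).getD r 0
        = d.getD r 0 + ((l.filter (fun p => k p == r)).map v).sum := by
  intro l
  induction l with
  | nil => intro d r; simp
  | cons p l ih =>
    intro d r
    rw [List.foldl_cons, ih]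
    by_cases hr : k p = r
    · subst hr
      rw [PySem.Dict.getD_insert, if_pos rfl]
      rw [List.filter_cons_of_pos (by simp)]
      simp only [List.map_cons, List.sum_cons]
      ring
    · rw [PySem.Dict.getD_insert, if_neg (fun hh => hr hh.symm)]
      rw [List.filter_cons_of_neg (by simp [hr])]

lemma keys_sumsB (maps : List String) :
    (sumsB maps (labelsB maps)).keys = PySem.Set.ofList ((landB maps).map (rootD maps)) := by
  unfold sumsB
  have h := PySem.Dict.keys_foldl_insert_key (landB maps)
    (fun p => (labelsB maps).getD p 0)
    (fun s p => s.getD ((labelsB maps).getD p 0) 0 + valAt maps p.1 p.2) PySem.Dict.empty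
  rw [h, PySem.Dict.keys_empty]
  rfl

lemma nodup_keys_sumsB (maps : List String) : (sumsB maps (labelsB maps)).keys.Nodup := by
  unfold sumsB
  exact PySem.Dict.nodup_keys_foldl_insert_key _ _ _ _ (by rw [PySem.Dict.keys_empty]; exact List.nodup_nil)

lemma getD_sumsB (maps : List String) (r : Int) :
    (sumsB maps (labelsB maps)).getD r 0 = sumOfRoot maps r := by
  unfold sumsB sumOfRoot
  rw [getD_foldl_insert_add (fun p => (labelsB maps).getD p 0) (fun p => valAt maps p.1 p.2)
    (landB maps) PySem.Dict.empty r]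
  simp only [PySem.Dict.getD_empty, zero_add]
  rfl

lemma map_rootD_minCells (maps : List String) :
    (minCells maps).map (rootD maps) = (minCells maps).map (idxB maps) := by
  apply List.map_congr_left
  intro p hp
  have := (List.mem_filter.1 hp).2
  exact beq_iff_eq.1 this

lemma nodup_map_rootD_minCells (maps : List String) : ((minCells maps).map (rootD maps)).Nodup := by
  rw [map_rootD_minCells]
  have hpw : (minCells maps).Pairwise (fun p q => idxB maps p < idxB maps q) :=
    (pairwise_landB maps).filter _
  have : ((minCells maps).map (idxB maps)).Pairwise (· < ·) :=
    List.Pairwise.map _ (fun a b h => h) hpw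
  exact this.imp (fun h => by omega)

lemma perm_roots (maps : List String) :
    ((minCells maps).map (rootD maps)).Perm (PySem.Set.ofList ((landB maps).map (rootD maps))) := by
  rw [List.perm_ext_iff_of_nodup (nodup_map_rootD_minCells maps) (PySem.Set.nodup_ofList _)]
  intro r
  rw [PySem.Set.mem_ofList]
  simp only [List.mem_map]
  constructor
  · rintro ⟨m, hm, rfl⟩
    exact ⟨m, (List.mem_filter.1 hm).1, rfl⟩
  · rintro ⟨p, hp, rfl⟩
    obtain ⟨e, hemem, _, hroot, heroot, _⟩ := root_mem maps hp
    refine ⟨e, List.mem_filter.2 ⟨hemem, beq_iff_eq.2 heroot⟩, ?_⟩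
    rw [heroot, ← hroot]

lemma sumsB_values_perm (maps : List String) :
    (sumsB maps (labelsB maps)).values.Perm ((minCells maps).map (compSumB maps)) := by
  rw [PySem.Dict.values_eq_map_keys _ (nodup_keys_sumsB maps) 0]
  have hvals : (sumsB maps (labelsB maps)).keys.map (fun r => (sumsB maps (labelsB maps)).getD r 0)
      = (sumsB maps (labelsB maps)).keys.map (sumOfRoot maps) := by
    apply List.map_congr_left
    intro r _
    exact getD_sumsB maps r
  rw [hvals, keys_sumsB maps]
  have hcomp : (minCells maps).map (compSumB maps)
      = ((minCells maps).map (rootD maps)).map (sumOfRoot maps) := by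
    rw [List.map_map]
    rfl
  rw [hcomp]
  exact (List.Perm.map (sumOfRoot maps) (perm_roots maps)).symm

lemma sumsB_items_nil_iff (maps : List String) :
    (sumsB maps (labelsB maps)).items = [] ↔ landB maps = [] := by
  constructor
  · intro h
    by_contra hne
    obtain ⟨p, hp⟩ := List.exists_mem_of_ne_nil _ hne
    have hmem : rootD maps p ∈ (sumsB maps (labelsB maps)).keys := by
      rw [keys_sumsB maps, PySem.Set.mem_ofList]
      exact List.mem_map.2 ⟨p, hp, rfl⟩
    unfold PySem.Dict.keys at hmem
    rw [h] at hmem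
    simp at hmem
  · intro h
    unfold sumsB
    rw [h]
    rfl

-- ===== Part 6: the outer double loop of port A =====

def flatA (maps : List String) : List Cell :=
  (PySem.List.pyRange 0 (gh maps) 1).flatMap (fun i =>
    (PySem.List.pyRange 0 (gw maps) 1).map (fun j => ((j : Int), (i : Int))))

def idxA (maps : List String) (c : Cell) : Int := idxB maps (swapC c)

def colF (maps : List String) (st : List Int × Vis) (c : Cell) : List Int × Vis :=
  colStepA maps c.2 st c.1

def predA (maps : List String) (c : Cell) : Bool :=
  (cellD maps c.2 c.1 != 'X') && (rootD maps (swapC c) == idxB maps (swapC c))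

def ansOf (maps : List String) (done : List Cell) : List Int :=
  (done.filter (predA maps)).map (fun c => compSumB maps (swapC c))

def InvA (maps : List String) (done : List Cell) (st : List Int × Vis) : Prop :=
  GoodV maps st.2 ∧
  (∀ x y : Int, 0 ≤ x → x < gw maps → 0 ≤ y → y < gh maps →
    (vget st.2 y x ≠ 0 ↔ ∃ c, c ∈ done ∧ elig maps c ∧ ConnA maps c (x, y))) ∧
  st.1 = ansOf maps done

lemma swapC_inj {a b : Cell} (h : swapC a = swapC b) : a = b := by
  rw [← swap_swap a, h, swap_swap]

lemma connR_swap (maps : List String) (c d : Cell) :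
    ConnR maps (swapC c) (swapC d) ↔ ConnA maps c d := by
  unfold ConnR
  rw [swap_swap, swap_swap]

lemma mem_flatA (maps : List String) (c : Cell) :
    c ∈ flatA maps ↔ 0 ≤ c.1 ∧ c.1 < gw maps ∧ 0 ≤ c.2 ∧ c.2 < gh maps := by
  obtain ⟨x, y⟩ := c
  simp only [flatA, List.mem_flatMap, List.mem_map, PySem.List.mem_pyRange_one, Prod.mk.injEq]
  constructor
  · rintro ⟨i, hi, j, hj, rfl, rfl⟩
    exact ⟨hj.1, hj.2, hi.1, hi.2⟩
  · rintro ⟨h1, h2, h3, h4⟩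
    exact ⟨y, ⟨h3, h4⟩, x, ⟨h1, h2⟩, rfl, rfl⟩

lemma pairwise_flatA (maps : List String) :
    (flatA maps).Pairwise (fun c d => idxA maps c < idxA maps d) := by
  unfold flatA
  rw [List.pairwise_flatMap]
  constructor
  · intro i _
    apply List.Pairwise.map
    · intro j1 j2 h
      exact h
    · apply (PySem.List.pairwise_lt_pyRange_one 0 (gw maps)).imp
      intro j1 j2 hlt
      simp only [idxA, idxB, swapC]
      omega
  · apply (PySem.List.pairwise_lt_pyRange_one 0 (gh maps)).imp
    intro i1 i2 hlt x hx y hy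
    simp only [List.mem_map, PySem.List.mem_pyRange_one] at hx hy
    obtain ⟨j1, ⟨hj1a, hj1b⟩, rfl⟩ := hx
    obtain ⟨j2, ⟨hj2a, hj2b⟩, rfl⟩ := hy
    simp only [idxA, idxB, swapC]
    exact idx_lt hlt hj1a hj1b hj2a

lemma nodup_flatA (maps : List String) : (flatA maps).Nodup := by
  apply (pairwise_flatA maps).imp
  intro p q h he
  rw [he] at h
  omega

-- the double pyRange fold of solution is the fold of colF over the flattened cell list
lemma solution_fold_flat (maps : List String) (st : List Int × Vis) :
    (PySem.List.pyRange 0 (gh maps) 1).foldl (rowStepA maps) st =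
      (flatA maps).foldl (colF maps) st := by
  unfold flatA
  rw [List.foldl_flatMap]
  apply PySem.List.foldl_congr_mem
  intro st' i _
  unfold rowStepA
  rw [List.foldl_map]
  rfl

-- the bfs total of a fresh start equals its component sum over the land list
lemma total_eq_compSum (maps : List String) (d : Cell) (hd : elig maps d) :
    valAt maps d.2 d.1 +
      (((cells maps).filter (fun c =>
        ((cellD maps c.2 c.1 != 'X') && (rootD maps (swapC c) == rootD maps (swapC d))) &&
          (c != d))).map (fun c => valAt maps c.2 c.1)).sum
      = compSumB maps (swapC d) := by
  have hpd : swapC d ∈ landB maps := (mem_landB maps (swapC d)).2 (by rw [swap_swap]; exact hd)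
  have hBnd : ((landB maps).filter
      (fun q => rootD maps q == rootD maps (swapC d))).Nodup := (nodup_landB maps).filter _
  have hpdB : swapC d ∈ (landB maps).filter (fun q => rootD maps q == rootD maps (swapC d)) :=
    List.mem_filter.2 ⟨hpd, beq_self_eq_true _⟩
  have hperm1 : ((landB maps).filter (fun q => rootD maps q == rootD maps (swapC d))).Perm
      (swapC d :: ((landB maps).filter
        (fun q => rootD maps q == rootD maps (swapC d))).erase (swapC d)) :=
    List.perm_cons_erase hpdB
  have herase : ((landB maps).filter
      (fun q => rootD maps q == rootD maps (swapC d))).erase (swapC d) =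
      ((landB maps).filter (fun q => rootD maps q == rootD maps (swapC d))).filter
        (fun q => q != swapC d) := hBnd.erase_eq_filter _
  have hperm2 : ((((cells maps).filter (fun c =>
      ((cellD maps c.2 c.1 != 'X') && (rootD maps (swapC c) == rootD maps (swapC d))) &&
        (c != d))).map swapC)).Perm
      (((landB maps).filter (fun q => rootD maps q == rootD maps (swapC d))).filter
        (fun q => q != swapC d)) := by
    rw [List.perm_ext_iff_of_nodup
      (((nodup_cells maps).filter _).map (fun a b => swapC_inj)) (hBnd.filter _)]
    intro q
    constructor
    · intro hq
      obtain ⟨c, hcA, hcq⟩ := List.mem_map.1 hq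
      obtain ⟨hcmem, hcprop⟩ := List.mem_filter.1 hcA
      rw [Bool.and_eq_true, Bool.and_eq_true] at hcprop
      obtain ⟨⟨hcX, hcroot⟩, hcne⟩ := hcprop
      obtain ⟨h1, h2, h3, h4⟩ := (mem_cells maps c).1 hcmem
      subst hcq
      apply List.mem_filter.2
      refine ⟨List.mem_filter.2 ⟨?_, ?_⟩, ?_⟩
      · exact (mem_landB maps (swapC c)).2
          (by rw [swap_swap]; exact ⟨h1, h2, h3, h4, by simpa using hcX⟩)
      · exact hcroot
      · rw [bne_iff_ne]
        intro he
        exact (by simpa using hcne : c ≠ d) (swapC_inj he)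
    · intro hq
      obtain ⟨hqB, hqne⟩ := List.mem_filter.1 hq
      obtain ⟨hqmem, hqroot⟩ := List.mem_filter.1 hqB
      obtain ⟨h1, h2, h3, h4, h5⟩ := (mem_landB maps q).1 hqmem
      apply List.mem_map.2
      refine ⟨swapC q, List.mem_filter.2 ⟨(mem_cells maps (swapC q)).2 ⟨h1, h2, h3, h4⟩, ?_⟩,
        swap_swap q⟩
      rw [Bool.and_eq_true, Bool.and_eq_true]
      refine ⟨⟨by simpa using h5, ?_⟩, ?_⟩
      · rw [swap_swap]
        exact hqroot
      · rw [bne_iff_ne]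
        intro he
        rw [bne_iff_ne] at hqne
        exact hqne (by rw [← swap_swap q, he])
  have hmapval : (((cells maps).filter (fun c =>
      ((cellD maps c.2 c.1 != 'X') && (rootD maps (swapC c) == rootD maps (swapC d))) &&
        (c != d))).map (fun c => valAt maps c.2 c.1)) =
      ((((cells maps).filter (fun c =>
      ((cellD maps c.2 c.1 != 'X') && (rootD maps (swapC c) == rootD maps (swapC d))) &&
        (c != d))).map swapC).map (fun q => valAt maps q.1 q.2)) := by
    rw [List.map_map]
    rfl
  have hsum2 := (hperm2.map (fun q => valAt maps q.1 q.2)).sum_eq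
  have hsum1 := (hperm1.map (fun q => valAt maps q.1 q.2)).sum_eq
  show valAt maps d.2 d.1 + _ = sumOfRoot maps (rootD maps (swapC d))
  unfold sumOfRoot
  rw [hmapval, hsum2, hsum1, herase]
  simp only [List.map_cons, List.sum_cons]
  rfl

set_option maxHeartbeats 2000000 in
lemma invA_step (maps : List String) (done rest : List Cell) (d : Cell) (st : List Int × Vis)
    (hsplit : flatA maps = done ++ d :: rest) (hinv : InvA maps done st) :
    InvA maps (done ++ [d]) (colF maps st d) := by
  obtain ⟨hGV, hmark, hans⟩ := hinv
  have hdmem : d ∈ flatA maps := by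
    rw [hsplit]
    exact List.mem_append.2 (Or.inr List.mem_cons_self)
  obtain ⟨hd1, hd2, hd3, hd4⟩ := (mem_flatA maps d).1 hdmem
  have hpw := pairwise_flatA maps
  rw [hsplit] at hpw
  have hpwapp := List.pairwise_append.1 hpw
  have hlt_done : ∀ c ∈ done, idxA maps c < idxA maps d :=
    fun c hc => hpwapp.2.2 c hc d List.mem_cons_self
  have hge_rest : ∀ c ∈ d :: rest, idxA maps d ≤ idxA maps c := by
    intro c hc
    rcases List.mem_cons.1 hc with rfl | hmem
    · exact le_refl _
    · exact le_of_lt ((List.pairwise_cons.1 hpwapp.2.1).1 c hmem)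
  have hprev : ∀ c : Cell, 0 ≤ c.1 → c.1 < gw maps → 0 ≤ c.2 → c.2 < gh maps →
      idxA maps c < idxA maps d → c ∈ done := by
    intro c h1 h2 h3 h4 hlt
    have hcf : c ∈ flatA maps := (mem_flatA maps c).2 ⟨h1, h2, h3, h4⟩
    rw [hsplit] at hcf
    rcases List.mem_append.1 hcf with h | h
    · exact h
    · exact absurd (hge_rest c h) (by omega)
  by_cases hX : cellD maps d.2 d.1 = 'X'
  · -- water: nothing happens
    have hg : ((cellD maps d.2 d.1 != 'X') && (vget st.2 d.2 d.1 == 0)) = false := by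
      simp [hX]
    have hcol : colF maps st d = st := by
      unfold colF colStepA
      rw [hg]
      rfl
    rw [hcol]
    refine ⟨hGV, ?_, ?_⟩
    · intro x y hx hxw hy hyh
      rw [hmark x y hx hxw hy hyh]
      constructor
      · rintro ⟨c, hc, he, hconn⟩
        exact ⟨c, List.mem_append.2 (Or.inl hc), he, hconn⟩
      · rintro ⟨c, hc, he, hconn⟩
        rcases List.mem_append.1 hc with h | h
        · exact ⟨c, h, he, hconn⟩
        · rw [List.mem_singleton.1 h] at he
          exact absurd he.2.2.2.2 (by simpa using hX)
    · rw [hans]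
      unfold ansOf
      rw [List.filter_append]
      have hfd : [d].filter (predA maps) = [] := by
        simp [predA, hX]
      rw [hfd, List.append_nil]
  · have helig : elig maps d := ⟨hd1, hd2, hd3, hd4, hX⟩
    have hpdland : swapC d ∈ landB maps := (mem_landB maps (swapC d)).2 (by
      rw [swap_swap]; exact helig)
    by_cases hvis : vget st.2 d.2 d.1 = 0
    · -- fresh start: d is the minimum cell of its component
      have hmin : rootD maps (swapC d) = idxB maps (swapC d) := by
        obtain ⟨e, hemem, heconn, heroot, heroot2, hele⟩ := root_mem maps hpdland
        rcases eq_or_lt_of_le hele with heq | hlt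
        · have : e = swapC d := idxB_inj maps hemem hpdland heq
          rw [heroot, this]
        · exfalso
          obtain ⟨he1, he2, he3, he4, he5⟩ := (mem_landB maps e).1 hemem
          have hidx : idxA maps (swapC e) = idxB maps e := by
            unfold idxA
            rw [swap_swap]
          have hc1done : swapC e ∈ done := by
            apply hprev (swapC e) he1 he2 he3 he4
            rw [hidx]
            exact lt_of_lt_of_le hlt (le_refl _) |>.trans_le (le_refl _) |>.trans_le (le_refl _)
          have hconn' : ConnA maps (swapC e) d := by
            have h1 := connR_symm maps hpdland heconn
            unfold ConnR at h1
            rw [swap_swap] at h1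
            exact h1
          have helig_e : elig maps (swapC e) := ⟨he1, he2, he3, he4, he5⟩
          have := (hmark d.1 d.2 hd1 hd2 hd3 hd4).2 ⟨swapC e, hc1done, helig_e, hconn'⟩
          exact this hvis
      have hguard : ((cellD maps d.2 d.1 != 'X') && (vget st.2 d.2 d.1 == 0)) = true := by
        simp [hX, hvis]
      have hcol : colF maps st d =
          (st.1 ++ [(bfsA maps d.1 d.2 st.2).1], (bfsA maps d.1 d.2 st.2).2) := by
        unfold colF colStepA
        rw [hguard]
        rfl
      have hclosed : ClosedV maps st.2 := by
        intro c hce hcnz e hen hee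
        obtain ⟨hca, hcb, hcc, hcd', _⟩ := id hce
        obtain ⟨hea, heb, hec, hed, _⟩ := id hee
        obtain ⟨c0, hc0, hc0e, hc0conn⟩ := (hmark c.1 c.2 hca hcb hcc hcd').1 hcnz
        exact (hmark e.1 e.2 hea heb hec hed).2 ⟨c0, hc0, hc0e, conn_step maps hc0conn hen hee⟩
      have hp : ∀ c, c ∈ cells maps →
          (((cellD maps c.2 c.1 != 'X') &&
            (rootD maps (swapC c) == rootD maps (swapC d))) = true ↔ ConnA maps d c) := by
        intro c hcc
        obtain ⟨hca, hcb, hcc', hcd'⟩ := (mem_cells maps c).1 hcc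
        constructor
        · intro h
          obtain ⟨hcX, hcroot⟩ := Bool.and_eq_true .. ▸ h
          have hcland : swapC c ∈ landB maps := (mem_landB maps (swapC c)).2 (by
            rw [swap_swap]
            exact ⟨hca, hcb, hcc', hcd', by simpa using hcX⟩)
          have hroots : rootD maps (swapC d) = rootD maps (swapC c) :=
            (beq_iff_eq.1 hcroot).symm
          exact (connR_swap maps d c).1 (conn_of_root_eq maps hpdland hcland hroots)
        · intro hconn
          have heligc : elig maps c := by
            rcases conn_elig maps hconn with rfl | h'
            · exact helig
            · exact h'
          have hcland : swapC c ∈ landB maps := (mem_landB maps (swapC c)).2 (by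
            rw [swap_swap]; exact heligc)
          have hroots : rootD maps (swapC d) = rootD maps (swapC c) :=
            label_const maps hpdland ((connR_swap maps d c).2 hconn)
          rw [Bool.and_eq_true]
          exact ⟨by simpa using heligc.2.2.2.2, beq_iff_eq.2 hroots.symm⟩
      obtain ⟨hb1, hb2, hb3, hb4⟩ := bfsA_char maps st.2 d helig hvis hclosed
        (fun c => (cellD maps c.2 c.1 != 'X') && (rootD maps (swapC c) == rootD maps (swapC d)))
        hp
      rw [hcol]
      refine ⟨⟨hb2.trans hGV.1, hb3 hGV.2⟩, ?_, ?_⟩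
      · intro x y hx hxw hy hyh
        dsimp only
        rw [hb1 x y hx hxw hy hyh]
        constructor
        · rintro (hold | hconn)
          · obtain ⟨c, hc, he, hcn⟩ := (hmark x y hx hxw hy hyh).1 hold
            exact ⟨c, List.mem_append.2 (Or.inl hc), he, hcn⟩
          · exact ⟨d, List.mem_append.2 (Or.inr List.mem_cons_self), helig, hconn⟩
        · rintro ⟨c, hc, he, hcn⟩
          rcases List.mem_append.1 hc with h | h
          · exact Or.inl ((hmark x y hx hxw hy hyh).2 ⟨c, h, he, hcn⟩)
          · rw [List.mem_singleton.1 h] at hcn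
            exact Or.inr hcn
      · dsimp only
        rw [hans]
        unfold ansOf
        rw [List.filter_append]
        have hfd : [d].filter (predA maps) = [d] := by
          have : predA maps d = true := by
            unfold predA
            rw [Bool.and_eq_true]
            exact ⟨by simpa using hX, beq_iff_eq.2 hmin⟩
          simp [this]
        rw [hfd, List.map_append]
        congr 1
        simp only [List.map_cons, List.map_nil]
        congr 1
        rw [hb4]
        exact total_eq_compSum maps d helig
    · -- already visited: d's component was counted before
      have hg : ((cellD maps d.2 d.1 != 'X') && (vget st.2 d.2 d.1 == 0)) = false := by
        simp [hvis]
      have hcol : colF maps st d = st := by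
        unfold colF colStepA
        rw [hg]
        rfl
      obtain ⟨c0, hc0done, hc0e, hc0conn⟩ := (hmark d.1 d.2 hd1 hd2 hd3 hd4).1 hvis
      rw [hcol]
      refine ⟨hGV, ?_, ?_⟩
      · intro x y hx hxw hy hyh
        rw [hmark x y hx hxw hy hyh]
        constructor
        · rintro ⟨c, hc, he, hconn⟩
          exact ⟨c, List.mem_append.2 (Or.inl hc), he, hconn⟩
        · rintro ⟨c, hc, he, hconn⟩
          rcases List.mem_append.1 hc with h | h
          · exact ⟨c, h, he, hconn⟩
          · rw [List.mem_singleton.1 h] at hconn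
            exact ⟨c0, hc0done, hc0e, conn_trans maps hc0conn hconn⟩
      · rw [hans]
        unfold ansOf
        rw [List.filter_append]
        have hc0land : swapC c0 ∈ landB maps := (mem_landB maps (swapC c0)).2 (by
          rw [swap_swap]; exact hc0e)
        have hconnR : ConnR maps (swapC c0) (swapC d) := (connR_swap maps c0 d).2 hc0conn
        have hle : rootD maps (swapC d) ≤ idxB maps (swapC c0) := by
          have hsym : ConnR maps (swapC d) (swapC c0) := connR_symm maps hc0land hconnR
          exact root_le maps hpdland hc0land hsym
        have hlt : idxB maps (swapC c0) < idxB maps (swapC d) := hlt_done c0 hc0done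
        have hfd : [d].filter (predA maps) = [] := by
          have : predA maps d = false := by
            unfold predA
            rw [Bool.and_eq_false_iff]
            right
            rw [beq_eq_false_iff_ne]
            omega
          simp [this]
        rw [hfd, List.append_nil]

lemma invA_fold (maps : List String) : ∀ (rest done : List Cell) (st : List Int × Vis),
    flatA maps = done ++ rest → InvA maps done st →
    InvA maps (done ++ rest) (rest.foldl (colF maps) st) := by
  intro rest
  induction rest with
  | nil =>
    intro done st hsplit hinv
    simpa using hinv
  | cons d rest ih =>
    intro done st hsplit hinv
    have hstep := invA_step maps done rest d st hsplit hinv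
    have hsplit' : flatA maps = (done ++ [d]) ++ rest := by
      rw [hsplit]
      simp
    have hres := ih (done ++ [d]) (colF maps st d) hsplit' hstep
    rw [List.foldl_cons]
    have hA : (done ++ [d]) ++ rest = done ++ d :: rest := by simp
    rw [hA] at hres
    exact hres

lemma invA_base (maps : List String) : InvA maps [] ([], zeroV maps) := by
  refine ⟨⟨?_, ?_⟩, ?_, rfl⟩
  · unfold zeroV
    rw [List.map_map]
    have h1 : (List.length ∘ fun _ : Int => (PySem.List.pyRange 0 (gw maps) 1).map
        (fun _ => (0 : Int))) = fun _ : Int => (gw maps).toNat := by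
      funext _
      simp [PySem.List.length_pyRange_one]
    rw [h1, List.map_const', PySem.List.length_pyRange_one]
    simp
  · intro r hr v hv
    unfold zeroV at hr
    obtain ⟨_, _, rfl⟩ := List.mem_map.1 hr
    obtain ⟨_, _, rfl⟩ := List.mem_map.1 hv
    exact Or.inl rfl
  · intro x y hx hxw hy hyh
    rw [vget_zeroV maps y x hx hxw hy hyh]
    constructor
    · intro h
      exact absurd rfl h
    · rintro ⟨c, hc, _⟩
      simp at hc

lemma ansF_perm (maps : List String) :
    (ansOf maps (flatA maps)).Perm ((minCells maps).map (compSumB maps)) := by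
  have hcore : (((flatA maps).filter (predA maps)).map swapC).Perm (minCells maps) := by
    unfold minCells
    rw [List.perm_ext_iff_of_nodup
      (((nodup_flatA maps).filter _).map (fun a b => swapC_inj))
      ((nodup_landB maps).filter _)]
    intro q
    constructor
    · intro hq
      obtain ⟨c, hcA, hcq⟩ := List.mem_map.1 hq
      obtain ⟨hcmem, hcpred⟩ := List.mem_filter.1 hcA
      obtain ⟨h1, h2, h3, h4⟩ := (mem_flatA maps c).1 hcmem
      obtain ⟨hcX, hcroot⟩ := Bool.and_eq_true .. ▸ hcpred
      subst hcq
      apply List.mem_filter.2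
      refine ⟨(mem_landB maps (swapC c)).2 ?_, ?_⟩
      · rw [swap_swap]
        exact ⟨h1, h2, h3, h4, by simpa using hcX⟩
      · exact hcroot
    · intro hq
      obtain ⟨hqmem, hqroot⟩ := List.mem_filter.1 hq
      obtain ⟨h1, h2, h3, h4, h5⟩ := (mem_landB maps q).1 hqmem
      apply List.mem_map.2
      refine ⟨swapC q, List.mem_filter.2 ⟨(mem_flatA maps (swapC q)).2 ⟨h1, h2, h3, h4⟩, ?_⟩,
        swap_swap q⟩
      unfold predA
      rw [Bool.and_eq_true, swap_swap]
      exact ⟨by simpa using h5, hqroot⟩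
  have h1 : ansOf maps (flatA maps) =
      (((flatA maps).filter (predA maps)).map swapC).map (compSumB maps) := by
    unfold ansOf
    rw [List.map_map]
    rfl
  rw [h1]
  exact hcore.map (compSumB maps)

-- ===== VERDICT (by name: the statement is the Claim_ definition above) =====
theorem solution_spec : Claim_equal_solution := by
  unfold Claim_equal_solution
  intro maps _ _
  unfold Spec_solution solution solution_alt
  dsimp only
  rw [show ((PySem.List.pyRange 0 (gh maps) 1).map
      (fun _ => (PySem.List.pyRange 0 (gw maps) 1).map (fun _ => (0 : Int)))) = zeroV maps from rfl]
  rw [solution_fold_flat maps ([], zeroV maps)]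
  have hfold := invA_fold maps (flatA maps) [] ([], zeroV maps) rfl (invA_base maps)
  have hansF : ((flatA maps).foldl (colF maps) ([], zeroV maps)).1 = ansOf maps (flatA maps) := by
    have h := hfold.2.2
    simpa using h
  rw [hansF]
  have hperm : (ansOf maps (flatA maps)).Perm (sumsB maps (labelsB maps)).values :=
    (ansF_perm maps).trans (sumsB_values_perm maps).symm
  by_cases hland : landB maps = []
  · have hitems : (sumsB maps (labelsB maps)).items = [] := (sumsB_items_nil_iff maps).2 hland
    have hvalsnil : (sumsB maps (labelsB maps)).values = [] := by
      unfold PySem.Dict.values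
      rw [hitems]
      rfl
    have hansnil : ansOf maps (flatA maps) = [] := by
      have := hperm
      rw [hvalsnil] at this
      exact this.eq_nil
    rw [hansnil, hitems]
    simp
  · have hitems : (sumsB maps (labelsB maps)).items ≠ [] := fun h =>
      hland ((sumsB_items_nil_iff maps).1 h)
    have hvalsne : (sumsB maps (labelsB maps)).values ≠ [] := by
      intro h
      apply hitems
      unfold PySem.Dict.values at h
      exact List.map_eq_nil_iff.1 h
    have hansne : ansOf maps (flatA maps) ≠ [] := by
      intro h
      apply hvalsne
      have := hperm
      rw [h] at this
      exact this.symm.eq_nil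
    rw [if_neg (by
      intro h
      exact hansne (List.length_eq_zero_iff.1 h)), if_neg hitems]
    exact (PySem.List.sorted_id_eq_sorted_id_iff_perm _ _).2 hperm
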